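-- pv_equiv track=rewrite | github.com/bigstar9906/Coding-test | 프로그래머스/2/159993. 미로 탈출/미로 탈출.py | solution
-- ===== SOURCE A (Python) =====
-- from collections import Counter,deque
--
-- def solution(maps):
--     answer = 0
--     row = len(maps)
--     column = len(maps[0])
--     start =[]
--     end = []
--     lever = []
--     startToLever = Counter()
--     leverToEnd = Counter()
--     for r in range(row):
--         for c in range(column):
--             if maps[r][c]=="S":
--                 start = [r,c]
--             if maps[r][c]=="L":
--                 lever = [r,c]
--             if maps[r][c]=="E":
--                 end = [r,c]
--     queue = deque()
--     if start[0]+1<row and maps[start[0]+1][start[1]]!="X":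
--         queue.append({'position':[start[0]+1,start[1]],'step':1})
--         startToLever[str(start[0]+1)+","+str(start[1])]+=1
--     if start[0]-1>-1 and maps[start[0]-1][start[1]]!="X":
--         queue.append({'position':[start[0]-1,start[1]],'step':1})
--         startToLever[str(start[0]+1)+","+str(start[1])]+=1
--     if start[1]+1<column and maps[start[0]][start[1]+1]!="X":
--         queue.append({'position':[start[0],start[1]+1],'step':1})
--         startToLever[str(start[0]+1)+","+str(start[1])]+=1
--     if start[1]-1>-1 and maps[start[0]][start[1]-1]!="X":
--         queue.append({'position':[start[0],start[1]-1],'step':1})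
--         startToLever[str(start[0]+1)+","+str(start[1])]+=1
--     while len(queue)>0:
--         current = queue.popleft()
--         if maps[current['position'][0]][current['position'][1]]=="L":
--             answer+=current['step']
--             break
--         if current['position'][0]+1<row and maps[current['position'][0]+1][current['position'][1]] !="X" and startToLever[str(current['position'][0]+1)+","+str(current['position'][1])]==0:
--             queue.append({'position':[current['position'][0]+1,current['position'][1]],'step':current['step']+1})
--             startToLever[str(current['position'][0]+1)+","+str(current['position'][1])]+=1
--         if current['position'][0]-1>-1 and maps[current['position'][0]-1][current['position'][1]] !="X" and startToLever[str(current['position'][0]-1)+","+str(current['position'][1])]==0: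
--             queue.append({'position':[current['position'][0]-1,current['position'][1]],'step':current['step']+1})
--             startToLever[str(current['position'][0]-1)+","+str(current['position'][1])]+=1
--         if current['position'][1]+1<column and maps[current['position'][0]][current['position'][1]+1] !="X" and startToLever[str(current['position'][0])+","+str(current['position'][1]+1)]==0:
--             queue.append({'position':[current['position'][0],current['position'][1]+1],'step':current['step']+1})
--             startToLever[str(current['position'][0])+","+str(current['position'][1]+1)]+=1
--         if current['position'][1]-1>-1 and maps[current['position'][0]][current['position'][1]-1] !="X" and startToLever[str(current['position'][0])+","+str(current['position'][1]-1)]==0: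
--             queue.append({'position':[current['position'][0],current['position'][1]-1],'step':current['step']+1})
--             startToLever[str(current['position'][0])+","+str(current['position'][1]-1)]+=1
--     if answer==0:
--         return -1
--     prev = answer
--     queue = deque()
--     if lever[0]+1<row and maps[lever[0]+1][lever[1]]!="X":
--         queue.append({'position':[lever[0]+1,lever[1]],'step':1})
--         leverToEnd[str(lever[0]+1)+","+str(lever[1])]+=1
--     if lever[0]-1>-1 and maps[lever[0]-1][lever[1]]!="X":
--         queue.append({'position':[lever[0]-1,lever[1]],'step':1})
--         leverToEnd[str(lever[0]-1)+","+str(lever[1])]+=1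
--     if lever[1]+1<column and maps[lever[0]][lever[1]+1]!="X":
--         queue.append({'position':[lever[0],lever[1]+1],'step':1})
--         leverToEnd[str(lever[0])+","+str(lever[1]+1)]+=1
--     if lever[1]-1>-1 and maps[lever[0]][lever[1]-1]!="X":
--         queue.append({'position':[lever[0],lever[1]-1],'step':1})
--         leverToEnd[str(lever[0])+","+str(lever[1]-1)]+=1
--     while len(queue)>0:
--         current = queue.popleft()
--         if maps[current['position'][0]][current['position'][1]]=="E":
--             answer+=current['step']
--             break
--         if current['position'][0]+1<row and maps[current['position'][0]+1][current['position'][1]] !="X" and leverToEnd[str(current['position'][0]+1)+","+str(current['position'][1])]==0: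
--             queue.append({'position':[current['position'][0]+1,current['position'][1]],'step':current['step']+1})
--             leverToEnd[str(current['position'][0]+1)+","+str(current['position'][1])]+=1
--         if current['position'][0]-1>-1 and maps[current['position'][0]-1][current['position'][1]] !="X" and leverToEnd[str(current['position'][0]-1)+","+str(current['position'][1])]==0:
--             queue.append({'position':[current['position'][0]-1,current['position'][1]],'step':current['step']+1})
--             leverToEnd[str(current['position'][0]-1)+","+str(current['position'][1])]+=1
--         if current['position'][1]+1<column and maps[current['position'][0]][current['position'][1]+1] !="X" and leverToEnd[str(current['position'][0])+","+str(current['position'][1]+1)]==0: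
--             queue.append({'position':[current['position'][0],current['position'][1]+1],'step':current['step']+1})
--             leverToEnd[str(current['position'][0])+","+str(current['position'][1]+1)]+=1
--         if current['position'][1]-1>-1 and maps[current['position'][0]][current['position'][1]-1] !="X" and leverToEnd[str(current['position'][0])+","+str(current['position'][1]-1)]==0:
--             queue.append({'position':[current['position'][0],current['position'][1]-1],'step':current['step']+1})
--             leverToEnd[str(current['position'][0])+","+str(current['position'][1]-1)]+=1
--     if answer==prev:
--         return -1
--     return answer
-- ===== SOURCE B (Python) =====
-- def _dist(maps, src, target):
--     """Level-synchronous BFS: expand whole distance layers (frontier sets) instead of a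
--     FIFO queue of per-node records; returns the layer number at which `target` first
--     appears, or None when the frontier dies out."""
--     row, col = len(maps), len(maps[0])
--     dirs = ((1, 0), (-1, 0), (0, 1), (0, -1))
--     frontier = set()
--     for dr, dc in dirs:
--         r, c = src[0] + dr, src[1] + dc
--         if 0 <= r < row and 0 <= c < col and maps[r][c] != 'X':
--             frontier.add((r, c))
--     seen = set(frontier)
--     step = 1
--     while frontier:
--         if any(maps[r][c] == target for r, c in frontier):
--             return step
--         nxt = set()
--         for r, c in frontier:
--             for dr, dc in dirs:
--                 nr, nc = r + dr, c + dc
--                 if 0 <= nr < row and 0 <= nc < col and maps[nr][nc] != 'X' \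
--                         and (nr, nc) not in seen:
--                     nxt.add((nr, nc))
--         seen |= nxt
--         frontier = nxt
--         step += 1
--     return None
--
--
-- def solution(maps):
--     row, col = len(maps), len(maps[0])
--     start = lever = None
--     for r in range(row):
--         for c in range(col):
--             ch = maps[r][c]
--             if ch == 'S':
--                 start = (r, c)
--             elif ch == 'L':
--                 lever = (r, c)
--     d1 = _dist(maps, start, 'L')
--     if d1 is None:
--         return -1
--     d2 = _dist(maps, lever, 'E')
--     if d2 is None:
--         return -1
--     return d1 + d2
-- ===== Notes on version B (the rewrite author's own statement) =====
-- stated objective: alternative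
-- what changed: A's two pasted-together FIFO BFS loops (a deque of {'position','step'} dicts with a string-keyed Counter as visited marks, whose stage-1 seeding marks the wrong keys) are replaced by a level-synchronous layered search: one _dist helper that repeatedly expands a whole frontier SET into the next distance layer (no queue, no per-node step records, whole-layer goal test), called twice (S->L then L->E).
import Mathlib
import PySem

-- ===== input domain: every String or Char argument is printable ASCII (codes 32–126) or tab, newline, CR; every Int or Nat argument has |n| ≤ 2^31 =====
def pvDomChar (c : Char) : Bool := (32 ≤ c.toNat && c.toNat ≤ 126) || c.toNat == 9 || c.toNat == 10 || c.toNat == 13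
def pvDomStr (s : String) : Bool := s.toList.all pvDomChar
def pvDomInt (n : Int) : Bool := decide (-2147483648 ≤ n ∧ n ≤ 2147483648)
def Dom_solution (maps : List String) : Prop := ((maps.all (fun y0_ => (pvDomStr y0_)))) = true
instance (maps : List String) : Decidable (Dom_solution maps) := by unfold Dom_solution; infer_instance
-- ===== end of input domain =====

-- B replaces A's two pasted FIFO-queue BFS loops (deque of {'position','step'} dicts plus a
-- string-keyed Counter of visited marks) by a level-synchronous layered search: one helper
-- expanding whole frontier sets layer by layer, called twice; return values agree on Pre_.

-- ===== PORT A =====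

-- maps[r][c] for the in-bounds accesses both programs make ('?' where Python would raise; such inputs are outside Pre_)
def pvCell (maps : List String) (r c : Int) : Char :=
  match PySem.List.pyGet? maps r with
  | some s => (PySem.Str.pyGet? s c).getD '?'
  | none => '?'

-- str(r) + "," + str(c), as the char list behind A's Counter keys
def pvKey (r c : Int) : List Char := PySem.Int.toChars r ++ ',' :: PySem.Int.toChars c

-- A's marker scan: three independent `if`s per cell, last match wins (start, lever, end)
def pvStepA (maps : List String) (r c : Int)
    (st : Option (Int × Int) × Option (Int × Int) × Option (Int × Int)) :
    Option (Int × Int) × Option (Int × Int) × Option (Int × Int) :=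
  let st := if pvCell maps r c = 'S' then ((some (r, c), st.2.1, st.2.2) :
    Option (Int × Int) × Option (Int × Int) × Option (Int × Int)) else st
  let st := if pvCell maps r c = 'L' then (st.1, some (r, c), st.2.2) else st
  if pvCell maps r c = 'E' then (st.1, st.2.1, some (r, c)) else st

def pvScanA (maps : List String) (row col : Int) :
    Option (Int × Int) × Option (Int × Int) × Option (Int × Int) :=
  (PySem.List.pyRange 0 row 1).foldl (fun st r =>
    (PySem.List.pyRange 0 col 1).foldl (fun st c => pvStepA maps r c st) st)
    (none, none, none)

def pvS1a (maps : List String) (row col : Int) (s0 s1 : Int)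
    (st : List ((Int × Int) × Int) × PySem.Dict (List Char) Int) :
    List ((Int × Int) × Int) × PySem.Dict (List Char) Int :=
  if s0 + 1 < row ∧ pvCell maps (s0+1) s1 ≠ 'X' then
    (st.1 ++ [((s0+1, s1), 1)], st.2.modify (pvKey (s0+1) s1) 0 (· + 1)) else st

def pvS1b (maps : List String) (row col : Int) (s0 s1 : Int)
    (st : List ((Int × Int) × Int) × PySem.Dict (List Char) Int) :
    List ((Int × Int) × Int) × PySem.Dict (List Char) Int :=
  if s0 - 1 > -1 ∧ pvCell maps (s0-1) s1 ≠ 'X' then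
    (st.1 ++ [((s0-1, s1), 1)], st.2.modify (pvKey (s0+1) s1) 0 (· + 1)) else st

def pvS1c (maps : List String) (row col : Int) (s0 s1 : Int)
    (st : List ((Int × Int) × Int) × PySem.Dict (List Char) Int) :
    List ((Int × Int) × Int) × PySem.Dict (List Char) Int :=
  if s1 + 1 < col ∧ pvCell maps s0 (s1+1) ≠ 'X' then
    (st.1 ++ [((s0, s1+1), 1)], st.2.modify (pvKey (s0+1) s1) 0 (· + 1)) else st

def pvS1d (maps : List String) (row col : Int) (s0 s1 : Int)
    (st : List ((Int × Int) × Int) × PySem.Dict (List Char) Int) :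
    List ((Int × Int) × Int) × PySem.Dict (List Char) Int :=
  if s1 - 1 > -1 ∧ pvCell maps s0 (s1-1) ≠ 'X' then
    (st.1 ++ [((s0, s1-1), 1)], st.2.modify (pvKey (s0+1) s1) 0 (· + 1)) else st

def pvS2a (maps : List String) (row col : Int) (s0 s1 : Int)
    (st : List ((Int × Int) × Int) × PySem.Dict (List Char) Int) :
    List ((Int × Int) × Int) × PySem.Dict (List Char) Int :=
  if s0 + 1 < row ∧ pvCell maps (s0+1) s1 ≠ 'X' then
    (st.1 ++ [((s0+1, s1), 1)], st.2.modify (pvKey (s0+1) s1) 0 (· + 1)) else st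

def pvS2b (maps : List String) (row col : Int) (s0 s1 : Int)
    (st : List ((Int × Int) × Int) × PySem.Dict (List Char) Int) :
    List ((Int × Int) × Int) × PySem.Dict (List Char) Int :=
  if s0 - 1 > -1 ∧ pvCell maps (s0-1) s1 ≠ 'X' then
    (st.1 ++ [((s0-1, s1), 1)], st.2.modify (pvKey (s0-1) s1) 0 (· + 1)) else st

def pvS2c (maps : List String) (row col : Int) (s0 s1 : Int)
    (st : List ((Int × Int) × Int) × PySem.Dict (List Char) Int) :
    List ((Int × Int) × Int) × PySem.Dict (List Char) Int :=
  if s1 + 1 < col ∧ pvCell maps s0 (s1+1) ≠ 'X' then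
    (st.1 ++ [((s0, s1+1), 1)], st.2.modify (pvKey s0 (s1+1)) 0 (· + 1)) else st

def pvS2d (maps : List String) (row col : Int) (s0 s1 : Int)
    (st : List ((Int × Int) × Int) × PySem.Dict (List Char) Int) :
    List ((Int × Int) × Int) × PySem.Dict (List Char) Int :=
  if s1 - 1 > -1 ∧ pvCell maps s0 (s1-1) ≠ 'X' then
    (st.1 ++ [((s0, s1-1), 1)], st.2.modify (pvKey s0 (s1-1)) 0 (· + 1)) else st

-- A's four enqueue-branches (one `if` per source line, conditions verbatim)
def pvBr1 (maps : List String) (row col : Int) (r c step : Int)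
    (st : List ((Int × Int) × Int) × PySem.Dict (List Char) Int) :
    List ((Int × Int) × Int) × PySem.Dict (List Char) Int :=
  if r + 1 < row ∧ pvCell maps (r+1) c ≠ 'X' ∧ st.2.getD (pvKey (r+1) c) 0 = 0 then
    (st.1 ++ [((r+1, c), step+1)], st.2.modify (pvKey (r+1) c) 0 (· + 1)) else st

def pvBr2 (maps : List String) (row col : Int) (r c step : Int)
    (st : List ((Int × Int) × Int) × PySem.Dict (List Char) Int) :
    List ((Int × Int) × Int) × PySem.Dict (List Char) Int :=
  if r - 1 > -1 ∧ pvCell maps (r-1) c ≠ 'X' ∧ st.2.getD (pvKey (r-1) c) 0 = 0 then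
    (st.1 ++ [((r-1, c), step+1)], st.2.modify (pvKey (r-1) c) 0 (· + 1)) else st

def pvBr3 (maps : List String) (row col : Int) (r c step : Int)
    (st : List ((Int × Int) × Int) × PySem.Dict (List Char) Int) :
    List ((Int × Int) × Int) × PySem.Dict (List Char) Int :=
  if c + 1 < col ∧ pvCell maps r (c+1) ≠ 'X' ∧ st.2.getD (pvKey r (c+1)) 0 = 0 then
    (st.1 ++ [((r, c+1), step+1)], st.2.modify (pvKey r (c+1)) 0 (· + 1)) else st

def pvBr4 (maps : List String) (row col : Int) (r c step : Int)
    (st : List ((Int × Int) × Int) × PySem.Dict (List Char) Int) :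
    List ((Int × Int) × Int) × PySem.Dict (List Char) Int :=
  if c - 1 > -1 ∧ pvCell maps r (c-1) ≠ 'X' ∧ st.2.getD (pvKey r (c-1)) 0 = 0 then
    (st.1 ++ [((r, c-1), step+1)], st.2.modify (pvKey r (c-1)) 0 (· + 1)) else st

-- A's while loop (fuel bounds the iteration count; the proofs show it never runs out)
def pvLoopA (maps : List String) (row col : Int) (target : Char) :
    Nat → List ((Int × Int) × Int) → PySem.Dict (List Char) Int → Int
  | 0, _, _ => 0
  | _ + 1, [], _ => 0
  | fuel + 1, ((r, c), step) :: rest, cnt =>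
    if pvCell maps r c = target then step
    else
      let st := pvBr4 maps row col r c step (pvBr3 maps row col r c step
        (pvBr2 maps row col r c step (pvBr1 maps row col r c step (rest, cnt))))
      pvLoopA maps row col target fuel st.1 st.2

-- A's stage-1 seeding: four `if`s; note the second/third/fourth bump the key of
-- (s0+1, s1) — exactly as A's source does
def pvSA1 (maps : List String) (row col : Int) (s0 s1 : Int) :
    List ((Int × Int) × Int) × PySem.Dict (List Char) Int :=
  pvS1d maps row col s0 s1 (pvS1c maps row col s0 s1 (pvS1b maps row col s0 s1
    (pvS1a maps row col s0 s1 ([], PySem.Dict.empty))))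

-- A's stage-2 seeding (correct keys)
def pvSA2 (maps : List String) (row col : Int) (l0 l1 : Int) :
    List ((Int × Int) × Int) × PySem.Dict (List Char) Int :=
  pvS2d maps row col l0 l1 (pvS2c maps row col l0 l1 (pvS2b maps row col l0 l1
    (pvS2a maps row col l0 l1 ([], PySem.Dict.empty))))

def solution (maps : List String) : Int :=
  let row : Int := PySem.List.len maps
  let col : Int := PySem.Str.len (PySem.List.pyGetD maps 0 "")   -- len(maps[0]) ([] is outside Pre_)
  let scan := pvScanA maps row col
  match scan.1 with
  | none => 0      -- Python raises IndexError (start == []); outside Pre_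
  | some (s0, s1) =>
    let fuel : Nat := 2 * (row.toNat * col.toNat) + 13
    let st := pvSA1 maps row col s0 s1
    let answer := pvLoopA maps row col 'L' fuel st.1 st.2
    if answer = 0 then -1
    else
      match scan.2.1 with
      | none => -1    -- Python would raise (lever == []); unreachable when answer ≠ 0
      | some (l0, l1) =>
        let prev := answer
        let st := pvSA2 maps row col l0 l1
        let answer := answer + pvLoopA maps row col 'E' fuel st.1 st.2
        if answer = prev then -1 else answer

-- ===== PORT B =====

def pvDirs : List (Int × Int) := [(1, 0), (-1, 0), (0, 1), (0, -1)]

-- the seed frontier: in-bounds non-'X' neighbours of src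
def pvSeedB (maps : List String) (row col : Int) (src : Int × Int) : PySem.Set (Int × Int) :=
  pvDirs.foldl (fun fr d =>
    let r := src.1 + d.1
    let c := src.2 + d.2
    if 0 ≤ r ∧ r < row ∧ 0 ≤ c ∧ c < col ∧ pvCell maps r c ≠ 'X' then
      PySem.Set.add fr (r, c)
    else fr) PySem.Set.empty

-- Source B's while loop: expand the whole frontier into the next layer
def pvLoopB (maps : List String) (row col : Int) (target : Char) :
    Nat → PySem.Set (Int × Int) → PySem.Set (Int × Int) → Int → Option Int
  | 0, _, _, _ => none
  | fuel + 1, frontier, seen, step =>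
    if frontier = [] then none
    else if frontier.any (fun p => pvCell maps p.1 p.2 == target) then some step
    else
      let nxt := frontier.foldl (fun nxt p =>
        pvDirs.foldl (fun nxt d =>
          let nr := p.1 + d.1
          let nc := p.2 + d.2
          if 0 ≤ nr ∧ nr < row ∧ 0 ≤ nc ∧ nc < col ∧ pvCell maps nr nc ≠ 'X' ∧
              ¬ ((nr, nc) ∈ seen) then
            PySem.Set.add nxt (nr, nc)
          else nxt) nxt) PySem.Set.empty
      pvLoopB maps row col target fuel nxt (PySem.Set.union seen nxt) (step + 1)

def pvDistB (maps : List String) (row col : Int) (src : Int × Int) (target : Char) : Option Int :=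
  let fr := pvSeedB maps row col src
  pvLoopB maps row col target (2 * (row.toNat * col.toNat) + 13) fr (PySem.Set.ofList fr) 1

-- Source B's marker scan (if/elif, last match wins)
def pvStepB (maps : List String) (r c : Int)
    (st : Option (Int × Int) × Option (Int × Int)) :
    Option (Int × Int) × Option (Int × Int) :=
  let ch := pvCell maps r c
  if ch = 'S' then ((some (r, c), st.2) : Option (Int × Int) × Option (Int × Int))
  else if ch = 'L' then (st.1, some (r, c))
  else st

def pvScanB (maps : List String) (row col : Int) :
    Option (Int × Int) × Option (Int × Int) :=
  (PySem.List.pyRange 0 row 1).foldl (fun st r =>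
    (PySem.List.pyRange 0 col 1).foldl (fun st c => pvStepB maps r c st) st)
    (none, none)

def solution_alt (maps : List String) : Int :=
  let row : Int := PySem.List.len maps
  let col : Int := PySem.Str.len (PySem.List.pyGetD maps 0 "")
  let scan := pvScanB maps row col
  match scan.1 with
  | none => 0      -- Python raises (start is None); outside Pre_
  | some start =>
    match pvDistB maps row col start 'L' with
    | none => -1
    | some d1 =>
      match scan.2 with
      | none => -1   -- Python would raise (lever is None); unreachable when d1 exists
      | some lever =>
        match pvDistB maps row col lever 'E' with
        | none => -1
        | some d2 => d1 + d2

-- ===== PRECONDITION & SPEC =====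

-- Pre_ excludes exactly the inputs on which Python A raises: the empty list (maps[0]),
-- a row shorter than the first row (maps[r][c] in the scan), and grids whose scanned
-- region holds no 'S' (start[0] on the empty list).
def Pre_solution (maps : List String) : Prop :=
  maps ≠ [] ∧
  (∀ s ∈ maps, (maps.headD "").toList.length ≤ s.toList.length) ∧
  (∃ s ∈ maps, 'S' ∈ s.toList.take (maps.headD "").toList.length)
instance (maps : List String) : Decidable (Pre_solution maps) := by unfold Pre_solution; infer_instance

def pvWitness_solution : List String := ["SL", "XE"]

def Spec_solution (maps : List String) (out : Int) : Prop := out = solution_alt maps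
instance (maps : List String) (out : Int) : Decidable (Spec_solution maps out) := by unfold Spec_solution; infer_instance

-- ===== CLAIM (what is proved, stated in full; the proofs are below) =====
def Claim_equal_solution : Prop := ∀ (maps : List String), Dom_solution maps → Pre_solution maps → Spec_solution maps (solution maps)

-- ===== LEMMAS AND PROOFS =====

-- open cell: in bounds and not a wall
def pvOpn (maps : List String) (row col : Int) (p : Int × Int) : Prop :=
  0 ≤ p.1 ∧ p.1 < row ∧ 0 ≤ p.2 ∧ p.2 < col ∧ pvCell maps p.1 p.2 ≠ 'X'

def pvAdj (p q : Int × Int) : Prop :=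
  (q = (p.1 + 1, p.2)) ∨ (q = (p.1 - 1, p.2)) ∨ (q = (p.1, p.2 + 1)) ∨ (q = (p.1, p.2 - 1))

-- reachable from src by a walk of exactly k moves through open cells (src itself unconstrained)
def pvW (maps : List String) (row col : Int) (src : Int × Int) : Nat → (Int × Int) → Prop
  | 0, p => p = src
  | k + 1, p => pvOpn maps row col p ∧ ∃ q, pvW maps row col src k q ∧ pvAdj q p

-- some cell holding `target` is reachable in exactly k moves
def pvHas (maps : List String) (row col : Int) (src : Int × Int) (target : Char) (k : Nat) : Prop :=
  ∃ p, pvW maps row col src k p ∧ pvCell maps p.1 p.2 = target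

-- an indexed witness walk of length D
def pvGoodWs (maps : List String) (row col : Int) (src : Int × Int) (target : Char)
    (ws : List (Int × Int)) : Prop :=
  1 ≤ ws.length ∧
  (∀ j (hj : j < ws.length), pvOpn maps row col ws[j]) ∧
  (∀ h0 : 0 < ws.length, pvAdj src (ws[0]'h0)) ∧
  (∀ j (hj : j + 1 < ws.length), pvAdj ws[j] ws[j+1]) ∧
  (∀ hl : ws.length - 1 < ws.length,
    pvCell maps (ws[ws.length - 1]'hl).1 (ws[ws.length - 1]'hl).2 = target)

theorem pvGoodWs_W (maps : List String) (row col : Int) (src : Int × Int) (target : Char)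
    (ws : List (Int × Int)) (h : pvGoodWs maps row col src target ws) :
    ∀ j (hj : j < ws.length), pvW maps row col src (j+1) (ws[j]) := by
  obtain ⟨h1, hop, hadj0, hchain, -⟩ := h
  intro j
  induction j with
  | zero => intro hj; exact ⟨hop 0 hj, src, rfl, hadj0 hj⟩
  | succ j ih =>
    intro hj
    exact ⟨hop (j+1) hj, ws[j], ih (by omega), hchain j hj⟩

theorem pvGoodWs_has (maps : List String) (row col : Int) (src : Int × Int) (target : Char)
    (ws : List (Int × Int)) (h : pvGoodWs maps row col src target ws) :
    pvHas maps row col src target ws.length := by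
  have h1 : 1 ≤ ws.length := h.1
  have hlast := h.2.2.2.2 (by omega)
  refine ⟨ws[ws.length - 1]'(by omega), ?_, hlast⟩
  have hW := pvGoodWs_W maps row col src target ws h (ws.length - 1) (by omega)
  have he : ws.length - 1 + 1 = ws.length := by omega
  rwa [he] at hW

theorem pvW_exists_ws (maps : List String) (row col : Int) (src : Int × Int) :
    ∀ k p, pvW maps row col src (k+1) p →
    ∃ ws : List (Int × Int), ws.length = k + 1 ∧
      (∀ j (hj : j < ws.length), pvOpn maps row col ws[j]) ∧
      (∀ h0 : 0 < ws.length, pvAdj src (ws[0]'h0)) ∧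
      (∀ j (hj : j + 1 < ws.length), pvAdj ws[j] ws[j+1]) ∧
      (∀ hk : k < ws.length, ws[k]'hk = p) := by
  intro k
  induction k with
  | zero =>
    intro p hp
    obtain ⟨hop, q, hq, hadj⟩ := hp
    cases hq
    refine ⟨[p], rfl, ?_, ?_, ?_, ?_⟩
    · intro j hj
      have : j = 0 := by simpa using hj
      subst this; simpa
    · intro h0; simpa
    · intro j hj; simp at hj
    · intro hk; rfl
  | succ k ih =>
    intro p hp
    obtain ⟨hop, q, hq, hadj⟩ := hp
    obtain ⟨ws, hlen, hopall, hadj0, hchain, hlast⟩ := ih q hq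
    refine ⟨ws ++ [p], by simp [hlen], ?_, ?_, ?_, ?_⟩
    · intro j hj
      simp [hlen] at hj
      by_cases hjk : j < k + 1
      · rw [List.getElem_append_left (by omega)]; exact hopall j (by omega)
      · have : j = k + 1 := by omega
        subst this
        rw [List.getElem_append_right (by omega)]
        simpa [hlen] using hop
    · intro h0
      rw [List.getElem_append_left (by omega)]; exact hadj0 (by omega)
    · intro j hj
      simp [hlen] at hj
      by_cases hjk : j + 1 < k + 1
      · rw [List.getElem_append_left (by omega), List.getElem_append_left (by omega)]
        exact hchain j (by omega)
      · have hjch : j = k := by omega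
        subst hjch
        rw [List.getElem_append_left (by omega), List.getElem_append_right (by omega)]
        simp only [hlen]
        have hq' := hlast (by omega)
        simp only [Nat.add_sub_cancel_left, Nat.sub_self, List.getElem_cons_zero]
        rw [hq']
        exact hadj
    · intro hk
      rw [List.getElem_append_right (by omega)]
      simp [hlen]

theorem pvHas_exists_good (maps : List String) (row col : Int) (src : Int × Int) (target : Char)
    (k : Nat) (h : pvHas maps row col src target (k+1)) :
    ∃ ws, pvGoodWs maps row col src target ws ∧ ws.length = k + 1 := by
  obtain ⟨p, hp, hcell⟩ := h
  obtain ⟨ws, hlen, hopall, hadj0, hchain, hlast⟩ := pvW_exists_ws maps row col src k p hp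
  refine ⟨ws, ⟨by omega, hopall, hadj0, hchain, ?_⟩, hlen⟩
  intro hl
  have he : ws.length - 1 = k := by omega
  simp only [he]
  rw [hlast (by omega)]
  exact hcell

theorem pvDrop_good (maps : List String) (row col : Int) (src : Int × Int) (target : Char)
    (ws : List (Int × Int)) (h : pvGoodWs maps row col src target ws)
    (j : Nat) (hj : j < ws.length) (hadj : pvAdj src (ws[j])) :
    pvGoodWs maps row col src target (ws.drop j) := by
  obtain ⟨h1, hop, hadj0, hchain, hlast⟩ := h
  have hlen : (ws.drop j).length = ws.length - j := by simp
  refine ⟨by omega, ?_, ?_, ?_, ?_⟩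
  · intro i hi
    rw [List.getElem_drop]
    exact hop _ (by simp at hi; omega)
  · intro h0
    rw [List.getElem_drop]
    simpa using hadj
  · intro i hi
    rw [List.getElem_drop, List.getElem_drop]
    have hx := hchain (j + i) (by simp at hi; omega)
    have he : j + (i + 1) = (j + i) + 1 := by omega
    simp only [he]
    exact hx
  · intro hl
    rw [List.getElem_drop]
    have he : j + ((ws.drop j).length - 1) = ws.length - 1 := by simp at hl ⊢; omega
    simp only [he]
    exact hlast (by omega)

theorem pvTake_good (maps : List String) (row col : Int) (src : Int × Int) (target : Char)
    (ws : List (Int × Int)) (h : pvGoodWs maps row col src target ws)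
    (i : Nat) (hi : i < ws.length)
    (hcell : pvCell maps (ws[i]).1 (ws[i]).2 = target) :
    pvGoodWs maps row col src target (ws.take (i+1)) := by
  obtain ⟨h1, hop, hadj0, hchain, hlast⟩ := h
  have hlen : (ws.take (i+1)).length = i + 1 := by simp; omega
  refine ⟨by omega, ?_, ?_, ?_, ?_⟩
  · intro m hm
    rw [List.getElem_take]
    exact hop _ (by simp at hm; omega)
  · intro h0
    rw [List.getElem_take]
    exact hadj0 (by omega)
  · intro m hm
    rw [List.getElem_take, List.getElem_take]
    exact hchain m (by rw [hlen] at hm; omega)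
  · intro hl
    rw [List.getElem_take]
    have he : (ws.take (i+1)).length - 1 = i := by omega
    simp only [he]
    exact hcell

-- a splice of a walk with a duplicated cell is again a walk
theorem pvSplice_good (maps : List String) (row col : Int) (src : Int × Int) (target : Char)
    (ws : List (Int × Int)) (h : pvGoodWs maps row col src target ws)
    (i j : Nat) (hij : i < j) (hj : j + 1 < ws.length)
    (hdup : ws[i]'(by omega) = ws[j]'(by omega)) :
    pvGoodWs maps row col src target (ws.take (i+1) ++ ws.drop (j+1)) := by
  obtain ⟨h1, hop, hadj0, hchain, hlast⟩ := h
  have hlt : i + 1 < ws.length := by omega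
  have hlen : (ws.take (i+1) ++ ws.drop (j+1)).length = (i+1) + (ws.length - (j+1)) := by
    simp; omega
  have htl : (ws.take (i+1)).length = i + 1 := by simp; omega
  refine ⟨by omega, ?_, ?_, ?_, ?_⟩
  · intro m hm
    by_cases hmi : m < i + 1
    · rw [List.getElem_append_left (by omega), List.getElem_take]
      exact hop m (by omega)
    · rw [List.getElem_append_right (by omega), List.getElem_drop]
      exact hop _ (by rw [hlen] at hm; simp only [htl]; omega)
  · intro h0
    rw [List.getElem_append_left (by omega), List.getElem_take]
    exact hadj0 (by omega)
  · intro m hm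
    rw [hlen] at hm
    by_cases hm1 : m + 1 < i + 1
    · rw [List.getElem_append_left (by omega), List.getElem_append_left (by omega),
        List.getElem_take, List.getElem_take]
      exact hchain m (by omega)
    · by_cases hm2 : m < i + 1
      · -- boundary: m = i
        have hmi : m = i := by omega
        subst hmi
        rw [List.getElem_append_left (by omega), List.getElem_append_right (by omega),
          List.getElem_take, List.getElem_drop]
        have he : j + 1 + (m + 1 - (ws.take (m+1)).length) = (j + 1) := by
          simp only [htl]; omega
        simp only [he]
        rw [hdup]
        exact hchain j (by omega)
      · rw [List.getElem_append_right (by omega), List.getElem_append_right (by omega),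
          List.getElem_drop, List.getElem_drop]
        have he1 : j + 1 + (m - (ws.take (i+1)).length) = j + 1 + (m - (i + 1)) := by
          simp only [htl]
        have he2 : j + 1 + (m + 1 - (ws.take (i+1)).length) = (j + 1 + (m - (i + 1))) + 1 := by
          simp only [htl]; omega
        simp only [he1, he2]
        exact hchain _ (by omega)
  · intro hl
    rw [List.getElem_append_right (by rw [hlen] at hl; simp only [htl]; omega), List.getElem_drop]
    have he : j + 1 + ((ws.take (i+1) ++ ws.drop (j+1)).length - 1 - (ws.take (i+1)).length)
        = ws.length - 1 := by
      rw [hlen]; simp only [htl]; omega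
    simp only [he]
    exact hlast (by omega)

-- a minimal-length witness walk is duplicate-free and touches the seed ring only at index 0
theorem pvMinWitness (maps : List String) (row col : Int) (src : Int × Int) (target : Char)
    (D : Nat) (hD : pvHas maps row col src target (D+1))
    (hmin : ∀ j, 1 ≤ j → j < D + 1 → ¬ pvHas maps row col src target j) :
    ∃ ws, pvGoodWs maps row col src target ws ∧ ws.length = D + 1 ∧
      (∀ i j (hi : i < ws.length) (hj : j < ws.length), ws[i] = ws[j] → i = j) ∧
      (∀ j (hj : j < ws.length), 0 < j → ¬ pvAdj src ws[j]) := by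
  obtain ⟨ws, hgood, hlen⟩ := pvHas_exists_good maps row col src target D hD
  refine ⟨ws, hgood, hlen, ?_, ?_⟩
  · -- nodup
    intro i j hi hj hdup
    by_contra hne
    rcases Nat.lt_or_ge i j with hij | hij
    · by_cases hjD : j + 1 < ws.length
      · have hg := pvSplice_good maps row col src target ws hgood i j hij hjD hdup
        have hh := pvGoodWs_has maps row col src target _ hg
        rw [show (ws.take (i+1) ++ ws.drop (j+1)).length = (i+1) + (ws.length - (j+1)) from by simp; omega] at hh
        exact hmin _ (by omega) (by omega) hh
      · -- j is the last index: ws[i] already carries the target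
        have hjlast : j = ws.length - 1 := by omega
        have hcell : pvCell maps (ws[i]).1 (ws[i]).2 = target := by
          rw [hdup]
          have := hgood.2.2.2.2 (by omega)
          simp only [hjlast]
          exact this
        have hg := pvTake_good maps row col src target ws hgood i hi hcell
        have hh := pvGoodWs_has maps row col src target _ hg
        rw [show (ws.take (i+1)).length = i + 1 from by simp; omega] at hh
        exact hmin _ (by omega) (by omega) hh
    · have hij' : j < i := by omega
      by_cases hiD : i + 1 < ws.length
      · have hg := pvSplice_good maps row col src target ws hgood j i hij' hiD hdup.symm
        have hh := pvGoodWs_has maps row col src target _ hg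
        rw [show (ws.take (j+1) ++ ws.drop (i+1)).length = (j+1) + (ws.length - (i+1)) from by simp; omega] at hh
        exact hmin _ (by omega) (by omega) hh
      · have hilast : i = ws.length - 1 := by omega
        have hcell : pvCell maps (ws[j]).1 (ws[j]).2 = target := by
          rw [← hdup]
          have := hgood.2.2.2.2 (by omega)
          simp only [hilast]
          exact this
        have hg := pvTake_good maps row col src target ws hgood j hj hcell
        have hh := pvGoodWs_has maps row col src target _ hg
        rw [show (ws.take (j+1)).length = j + 1 from by simp; omega] at hh
        exact hmin _ (by omega) (by omega) hh
  · -- no seed beyond index 0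
    intro j hj h0 hadj
    have hg := pvDrop_good maps row col src target ws hgood j hj hadj
    have hh := pvGoodWs_has maps row col src target _ hg
    rw [show (ws.drop j).length = ws.length - j from by simp] at hh
    exact hmin _ (by omega) (by omega) hh

-- ==== B-side analysis ====

-- seen-by-layer-k
def pvSn (maps : List String) (row col : Int) (src : Int × Int) (k : Nat) (p : Int × Int) : Prop :=
  ∃ j, 1 ≤ j ∧ j ≤ k ∧ pvW maps row col src j p

theorem pvMemCondAdd {C : Prop} [Decidable C] (s : PySem.Set (Int × Int)) (q p : Int × Int) :
    (p ∈ (if C then PySem.Set.add s q else s)) ↔ ((C ∧ p = q) ∨ p ∈ s) := by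
  split_ifs with h
  · rw [PySem.Set.mem_add]; tauto
  · tauto

theorem pvSeedB_mem (maps : List String) (row col : Int) (src : Int × Int) (p : Int × Int) :
    p ∈ pvSeedB maps row col src ↔ pvOpn maps row col p ∧ pvAdj src p := by
  simp only [pvSeedB, pvDirs, List.foldl, pvMemCondAdd, add_zero, ← sub_eq_add_neg]
  constructor
  · rintro (⟨h, rfl⟩ | ⟨h, rfl⟩ | ⟨h, rfl⟩ | ⟨h, rfl⟩ | h)
    · exact ⟨h, Or.inr (Or.inr (Or.inr rfl))⟩
    · exact ⟨h, Or.inr (Or.inr (Or.inl rfl))⟩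
    · exact ⟨h, Or.inr (Or.inl rfl)⟩
    · exact ⟨h, Or.inl rfl⟩
    · simp [PySem.Set.empty] at h
  · rintro ⟨hop, hadj⟩
    rcases hadj with rfl | rfl | rfl | rfl
    · exact Or.inr (Or.inr (Or.inr (Or.inl ⟨hop, rfl⟩)))
    · exact Or.inr (Or.inr (Or.inl ⟨hop, rfl⟩))
    · exact Or.inr (Or.inl ⟨hop, rfl⟩)
    · exact Or.inl ⟨hop, rfl⟩

-- membership in the inner 4-direction expansion of one frontier cell
theorem pvInner_mem (maps : List String) (row col : Int) (seen : PySem.Set (Int × Int))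
    (p : Int × Int) (acc : PySem.Set (Int × Int)) (q : Int × Int) :
    q ∈ (pvDirs.foldl (fun nxt d =>
          let nr := p.1 + d.1
          let nc := p.2 + d.2
          if 0 ≤ nr ∧ nr < row ∧ 0 ≤ nc ∧ nc < col ∧ pvCell maps nr nc ≠ 'X' ∧
              ¬ ((nr, nc) ∈ seen) then
            PySem.Set.add nxt (nr, nc)
          else nxt) acc) ↔
      (pvAdj p q ∧ pvOpn maps row col q ∧ q ∉ seen) ∨ q ∈ acc := by
  simp only [pvDirs, List.foldl, pvMemCondAdd, add_zero, ← sub_eq_add_neg]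
  constructor
  · rintro (⟨⟨h1,h2,h3,h4,h5,h6⟩, rfl⟩ | ⟨⟨h1,h2,h3,h4,h5,h6⟩, rfl⟩ |
      ⟨⟨h1,h2,h3,h4,h5,h6⟩, rfl⟩ | ⟨⟨h1,h2,h3,h4,h5,h6⟩, rfl⟩ | h)
    · exact Or.inl ⟨Or.inr (Or.inr (Or.inr rfl)), ⟨h1,h2,h3,h4,h5⟩, h6⟩
    · exact Or.inl ⟨Or.inr (Or.inr (Or.inl rfl)), ⟨h1,h2,h3,h4,h5⟩, h6⟩
    · exact Or.inl ⟨Or.inr (Or.inl rfl), ⟨h1,h2,h3,h4,h5⟩, h6⟩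
    · exact Or.inl ⟨Or.inl rfl, ⟨h1,h2,h3,h4,h5⟩, h6⟩
    · exact Or.inr h
  · rintro (⟨hadj, hop, hseen⟩ | h)
    · rcases hadj with rfl | rfl | rfl | rfl
      · exact Or.inr (Or.inr (Or.inr (Or.inl
          ⟨⟨hop.1, hop.2.1, hop.2.2.1, hop.2.2.2.1, hop.2.2.2.2, hseen⟩, rfl⟩)))
      · exact Or.inr (Or.inr (Or.inl
          ⟨⟨hop.1, hop.2.1, hop.2.2.1, hop.2.2.2.1, hop.2.2.2.2, hseen⟩, rfl⟩))
      · exact Or.inr (Or.inl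
          ⟨⟨hop.1, hop.2.1, hop.2.2.1, hop.2.2.2.1, hop.2.2.2.2, hseen⟩, rfl⟩)
      · exact Or.inl
          ⟨⟨hop.1, hop.2.1, hop.2.2.1, hop.2.2.2.1, hop.2.2.2.2, hseen⟩, rfl⟩
    · exact Or.inr (Or.inr (Or.inr (Or.inr h)))

theorem pvNxt_mem (maps : List String) (row col : Int) (seen : PySem.Set (Int × Int))
    (frontier : List (Int × Int)) (acc : PySem.Set (Int × Int)) (q : Int × Int) :
    q ∈ (frontier.foldl (fun nxt p =>
        pvDirs.foldl (fun nxt d =>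
          let nr := p.1 + d.1
          let nc := p.2 + d.2
          if 0 ≤ nr ∧ nr < row ∧ 0 ≤ nc ∧ nc < col ∧ pvCell maps nr nc ≠ 'X' ∧
              ¬ ((nr, nc) ∈ seen) then
            PySem.Set.add nxt (nr, nc)
          else nxt) nxt) acc) ↔
      (∃ p ∈ frontier, pvAdj p q ∧ pvOpn maps row col q ∧ q ∉ seen) ∨ q ∈ acc := by
  induction frontier generalizing acc with
  | nil => simp
  | cons p t ih =>
    rw [List.foldl_cons, ih]
    rw [pvInner_mem]
    constructor
    · rintro (⟨x, hx, hrest⟩|(⟨hadj, hrest⟩|hacc))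
      · exact Or.inl ⟨x, by simp [hx], hrest⟩
      · exact Or.inl ⟨p, by simp, hadj, hrest⟩
      · exact Or.inr hacc
    · rintro (⟨x, hx, hrest⟩|hacc)
      · rcases List.mem_cons.mp hx with rfl | hxt
        · exact Or.inr (Or.inl ⟨hrest.1, hrest.2⟩)
        · exact Or.inl ⟨x, hxt, hrest⟩
      · exact Or.inr (Or.inr hacc)

theorem pvSn_zero (maps : List String) (row col : Int) (src p : Int × Int) :
    pvSn maps row col src 0 p ↔ False :=
  ⟨fun ⟨_, h1, h2, _⟩ => by omega, False.elim⟩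

theorem pvSn_succ (maps : List String) (row col : Int) (src p : Int × Int) (k : Nat) :
    pvSn maps row col src (k+1) p ↔ pvSn maps row col src k p ∨ pvW maps row col src (k+1) p := by
  constructor
  · rintro ⟨j, h1, h2, hw⟩
    by_cases hj : j ≤ k
    · exact Or.inl ⟨j, h1, hj, hw⟩
    · have : j = k + 1 := by omega
      subst this; exact Or.inr hw
  · rintro (⟨j, h1, h2, hw⟩ | hw)
    · exact ⟨j, h1, by omega, hw⟩
    · exact ⟨k+1, by omega, by omega, hw⟩

theorem pvOpn_of_W (maps : List String) (row col : Int) (src p : Int × Int) {m : Nat}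
    (h1 : 1 ≤ m) (h : pvW maps row col src m p) : pvOpn maps row col p := by
  cases m with
  | zero => omega
  | succ m => exact h.1

-- once a fresh layer is empty, every later walk endpoint was already seen
theorem pvDead (maps : List String) (row col : Int) (src : Int × Int) (k : Nat)
    (hempty : ∀ p, ¬ (pvW maps row col src (k+1) p ∧ ¬ pvSn maps row col src k p)) :
    ∀ m, k + 1 ≤ m → ∀ p, pvW maps row col src m p → pvSn maps row col src k p := by
  intro m hm
  induction m, hm using Nat.le_induction with
  | base =>
    intro p hw
    by_contra hns
    exact hempty p ⟨hw, hns⟩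
  | succ m hm ih =>
    intro p hw
    obtain ⟨hop, q, hq, hadj⟩ := (by exact hw : pvOpn maps row col p ∧
      ∃ q, pvW maps row col src m q ∧ pvAdj q p)
    obtain ⟨j, hj1, hj2, hwj⟩ := ih q hq
    have hwp : pvW maps row col src (j+1) p := ⟨hop, q, hwj, hadj⟩
    by_cases hjk : j + 1 ≤ k
    · exact ⟨j+1, by omega, hjk, hwp⟩
    · have : j + 1 = k + 1 := by omega
      rw [this] at hwp
      by_contra hns
      exact hempty p ⟨hwp, hns⟩

def pvGrid (row col : Int) : Finset (Int × Int) :=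
  ((Finset.range row.toNat) ×ˢ (Finset.range col.toNat)).image
    (fun rc => ((rc.1 : Int), (rc.2 : Int)))

theorem pvGrid_mem (row col : Int) (p : Int × Int) :
    p ∈ pvGrid row col ↔ 0 ≤ p.1 ∧ p.1 < row ∧ 0 ≤ p.2 ∧ p.2 < col := by
  simp only [pvGrid, Finset.mem_image, Finset.mem_product, Finset.mem_range]
  constructor
  · rintro ⟨⟨a, b⟩, ⟨ha, hb⟩, rfl⟩
    simp; omega
  · rintro ⟨h1, h2, h3, h4⟩
    refine ⟨(p.1.toNat, p.2.toNat), ⟨by omega, by omega⟩, ?_⟩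
    simp only
    rw [Int.toNat_of_nonneg h1, Int.toNat_of_nonneg h3]

theorem pvGrid_card (row col : Int) : (pvGrid row col).card = row.toNat * col.toNat := by
  rw [pvGrid, Finset.card_image_of_injective _ (fun a b hab => by
    simp only [Prod.ext_iff] at hab
    exact Prod.ext (by exact_mod_cast hab.1) (by exact_mod_cast hab.2)),
    Finset.card_product, Finset.card_range, Finset.card_range]

def pvUnseenB (row col : Int) (seen : List (Int × Int)) : Nat :=
  ((pvGrid row col).filter (fun p => p ∉ seen)).card

theorem pvUnseenB_le (row col : Int) (seen : List (Int × Int)) :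
    pvUnseenB row col seen ≤ row.toNat * col.toNat := by
  rw [← pvGrid_card row col]
  exact Finset.card_filter_le _ _

-- the next-layer set Source B builds in one loop round
def pvNxtB (maps : List String) (row col : Int) (frontier seen : PySem.Set (Int × Int)) :
    PySem.Set (Int × Int) :=
  frontier.foldl (fun nxt p =>
    pvDirs.foldl (fun nxt d =>
      let nr := p.1 + d.1
      let nc := p.2 + d.2
      if 0 ≤ nr ∧ nr < row ∧ 0 ≤ nc ∧ nc < col ∧ pvCell maps nr nc ≠ 'X' ∧
          ¬ ((nr, nc) ∈ seen) then
        PySem.Set.add nxt (nr, nc)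
      else nxt) nxt) PySem.Set.empty

theorem pvLoopB_succ (maps : List String) (row col : Int) (target : Char)
    (fuel : Nat) (frontier seen : PySem.Set (Int × Int)) (step : Int)
    (h1 : ¬ (frontier = [])) (h2 : ¬ (frontier.any (fun p => pvCell maps p.1 p.2 == target) = true)) :
    pvLoopB maps row col target (fuel+1) frontier seen step =
      pvLoopB maps row col target fuel (pvNxtB maps row col frontier seen)
        (PySem.Set.union seen (pvNxtB maps row col frontier seen)) (step + 1) := by
  rw [pvLoopB, if_neg h1, if_neg h2]
  rfl

theorem pvNxtB_mem (maps : List String) (row col : Int) (src : Int × Int)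
    (frontier seen : PySem.Set (Int × Int)) (k : Nat)
    (hf : ∀ p, p ∈ frontier ↔ (pvW maps row col src (k+1) p ∧ ¬ pvSn maps row col src k p))
    (hs : ∀ p, p ∈ seen ↔ pvSn maps row col src (k+1) p) :
    ∀ q, q ∈ pvNxtB maps row col frontier seen ↔
      (pvW maps row col src (k+2) q ∧ ¬ pvSn maps row col src (k+1) q) := by
  intro q
  rw [pvNxtB, pvNxt_mem]
  constructor
  · rintro (⟨p, hp, hadj, hop, hseen⟩ | hacc)
    · have hw := (hf p).mp hp
      have hnsq : ¬ pvSn maps row col src (k+1) q := fun hsn => hseen ((hs q).mpr hsn)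
      exact ⟨⟨hop, p, hw.1, hadj⟩, hnsq⟩
    · simp [PySem.Set.empty] at hacc
  · rintro ⟨⟨hop, p, hwp, hadj⟩, hns⟩
    left
    have hnsp : ¬ pvSn maps row col src k p := by
      intro hsn
      obtain ⟨j, hj1, hj2, hwj⟩ := hsn
      exact hns ⟨j+1, by omega, by omega, ⟨hop, p, hwj, hadj⟩⟩
    refine ⟨p, (hf p).mpr ⟨hwp, hnsp⟩, hadj, hop, fun hse => hns ((hs q).mp hse)⟩

-- one loop round: invariant re-establishment and fuel bookkeeping, shared by both cases
theorem pvRound (maps : List String) (row col : Int) (target : Char) (src : Int × Int)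
    (frontier seen : PySem.Set (Int × Int)) (k : Nat)
    (hf : ∀ p, p ∈ frontier ↔ (pvW maps row col src (k+1) p ∧ ¬ pvSn maps row col src k p))
    (hs : ∀ p, p ∈ seen ↔ pvSn maps row col src (k+1) p) :
    (∀ p, p ∈ PySem.Set.union seen (pvNxtB maps row col frontier seen) ↔
        pvSn maps row col src (k+2) p) ∧
    (pvNxtB maps row col frontier seen ≠ [] →
      pvUnseenB row col (PySem.Set.union seen (pvNxtB maps row col frontier seen)) <
        pvUnseenB row col seen) := by
  have hnx := pvNxtB_mem maps row col src frontier seen k hf hs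
  constructor
  · intro p
    rw [PySem.Set.mem_union, hs, hnx, pvSn_succ maps row col src p (k+1)]
    constructor
    · rintro (h | ⟨hw, -⟩)
      · exact Or.inl h
      · exact Or.inr hw
    · rintro (h | hw)
      · exact Or.inl h
      · by_cases hsn : pvSn maps row col src (k+1) p
        · exact Or.inl hsn
        · exact Or.inr ⟨hw, hsn⟩
  · intro hne
    obtain ⟨q, hq⟩ := List.exists_mem_of_ne_nil _ hne
    have hqf := (hnx q).mp hq
    have hqgrid : q ∈ pvGrid row col := by
      have hop := pvOpn_of_W maps row col src q (by omega) hqf.1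
      exact (pvGrid_mem row col q).mpr ⟨hop.1, hop.2.1, hop.2.2.1, hop.2.2.2.1⟩
    have hqseen : q ∉ seen := fun hse => hqf.2 ((hs q).mp hse)
    have hqseen' : q ∈ PySem.Set.union seen (pvNxtB maps row col frontier seen) :=
      (PySem.Set.mem_union _ _ q).mpr (Or.inr hq)
    apply Finset.card_lt_card
    constructor
    · intro p hp
      simp only [Finset.mem_filter] at hp ⊢
      refine ⟨hp.1, fun hpse => hp.2 ((PySem.Set.mem_union _ _ p).mpr (Or.inl hpse))⟩
    · intro hsub
      have := hsub (Finset.mem_filter.mpr ⟨hqgrid, by simpa using hqseen⟩)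
      simp only [Finset.mem_filter] at this
      exact this.2 (by simpa using hqseen')

theorem pvLoopB_found (maps : List String) (row col : Int) (target : Char) (src : Int × Int)
    (D : Nat) (hD : pvHas maps row col src target D) (hD1 : 1 ≤ D)
    (hDmin : ∀ j, 1 ≤ j → j < D → ¬ pvHas maps row col src target j) :
    ∀ fuel (frontier seen : PySem.Set (Int × Int)) (k : Nat),
    (∀ p, p ∈ frontier ↔ (pvW maps row col src (k+1) p ∧ ¬ pvSn maps row col src k p)) →
    (∀ p, p ∈ seen ↔ pvSn maps row col src (k+1) p) →
    (∀ j, 1 ≤ j → j < k + 1 → ¬ pvHas maps row col src target j) →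
    pvUnseenB row col seen + 2 ≤ fuel →
    pvLoopB maps row col target fuel frontier seen ((k:Int)+1) = some (D:Int) := by
  intro fuel
  induction fuel with
  | zero => intro _ _ _ _ _ _ hfuel; omega
  | succ fuel ih =>
    intro frontier seen k hf hs hnot hfuel
    have hDk : k + 1 ≤ D := by
      by_contra hlt
      exact hnot D hD1 (by omega) hD
    by_cases hfr : frontier = []
    · exfalso
      subst hfr
      have hempty : ∀ p, ¬ (pvW maps row col src (k+1) p ∧ ¬ pvSn maps row col src k p) := by
        intro p hp
        simpa using (hf p).mpr hp
      obtain ⟨p, hw, hcell⟩ := hD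
      obtain ⟨j, hj1, hj2, hwj⟩ := pvDead maps row col src k hempty D hDk p hw
      exact hnot j hj1 (by omega) ⟨p, hwj, hcell⟩
    · by_cases hany : frontier.any (fun p => pvCell maps p.1 p.2 == target) = true
      · rw [pvLoopB, if_neg hfr, if_pos hany]
        obtain ⟨p, hmem, hcell⟩ := List.any_eq_true.mp hany
        have hcell' : pvCell maps p.1 p.2 = target := by simpa using hcell
        have hw := (hf p).mp hmem
        have hhask : pvHas maps row col src target (k+1) := ⟨p, hw.1, hcell'⟩
        have heq : D = k + 1 := by
          by_contra hne
          exact hDmin (k+1) (by omega) (by omega) hhask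
        subst heq
        norm_num
      · rw [pvLoopB_succ maps row col target fuel frontier seen _ hfr hany]
        have hany' : ∀ p ∈ frontier, pvCell maps p.1 p.2 ≠ target := by
          intro p hp hc
          exact hany (List.any_eq_true.mpr ⟨p, hp, by simpa using hc⟩)
        have hnot' : ∀ j, 1 ≤ j → j < k + 2 → ¬ pvHas maps row col src target j := by
          intro j hj1 hj2 hhas
          by_cases hjk : j < k + 1
          · exact hnot j hj1 hjk hhas
          · have hj : j = k + 1 := by omega
            subst hj
            obtain ⟨p, hw, hcell⟩ := hhas
            by_cases hsn : pvSn maps row col src k p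
            · obtain ⟨j', hj'1, hj'2, hwj'⟩ := hsn
              exact hnot j' hj'1 (by omega) ⟨p, hwj', hcell⟩
            · exact hany' p ((hf p).mpr ⟨hw, hsn⟩) hcell
        obtain ⟨hs', hdec⟩ := pvRound maps row col target src frontier seen k hf hs
        have hnx := pvNxtB_mem maps row col src frontier seen k hf hs
        by_cases hN : pvNxtB maps row col frontier seen = []
        · exfalso
          have hempty : ∀ p, ¬ (pvW maps row col src (k+2) p ∧ ¬ pvSn maps row col src (k+1) p) := by
            intro p hp
            have := (hnx p).mpr hp
            rw [hN] at this
            simpa using this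
          have hDk2 : k + 2 ≤ D := by
            rcases Nat.lt_or_ge D (k+2) with h | h
            · exact absurd hD (hnot' D hD1 h)
            · exact h
          obtain ⟨p, hw, hcell⟩ := hD
          obtain ⟨j, hj1, hj2, hwj⟩ := pvDead maps row col src (k+1) hempty D hDk2 p hw
          exact hnot' j hj1 (by omega) ⟨p, hwj, hcell⟩
        · have hcast : ((k:Int)+1)+1 = ((k+1 : Nat) : Int) + 1 := by push_cast; ring
          rw [hcast]
          exact ih _ _ (k+1) hnx hs' hnot' (by have := hdec hN; omega)

theorem pvLoopB_none (maps : List String) (row col : Int) (target : Char) (src : Int × Int)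
    (hnone : ∀ j, 1 ≤ j → ¬ pvHas maps row col src target j) :
    ∀ fuel (frontier seen : PySem.Set (Int × Int)) (k : Nat),
    (∀ p, p ∈ frontier ↔ (pvW maps row col src (k+1) p ∧ ¬ pvSn maps row col src k p)) →
    (∀ p, p ∈ seen ↔ pvSn maps row col src (k+1) p) →
    pvUnseenB row col seen + 2 ≤ fuel →
    pvLoopB maps row col target fuel frontier seen ((k:Int)+1) = none := by
  intro fuel
  induction fuel with
  | zero => intro _ _ _ _ _ hfuel; omega
  | succ fuel ih =>
    intro frontier seen k hf hs hfuel
    by_cases hfr : frontier = []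
    · rw [pvLoopB, if_pos hfr]
    · by_cases hany : frontier.any (fun p => pvCell maps p.1 p.2 == target) = true
      · exfalso
        obtain ⟨p, hmem, hcell⟩ := List.any_eq_true.mp hany
        have hw := (hf p).mp hmem
        exact hnone (k+1) (by omega) ⟨p, hw.1, by simpa using hcell⟩
      · rw [pvLoopB_succ maps row col target fuel frontier seen _ hfr hany]
        obtain ⟨hs', hdec⟩ := pvRound maps row col target src frontier seen k hf hs
        have hnx := pvNxtB_mem maps row col src frontier seen k hf hs
        by_cases hN : pvNxtB maps row col frontier seen = []
        · cases fuel with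
          | zero => omega
          | succ fuel' =>
            rw [hN, pvLoopB, if_pos rfl]
        · have hcast : ((k:Int)+1)+1 = ((k+1 : Nat) : Int) + 1 := by push_cast; ring
          rw [hcast]
          exact ih _ _ (k+1) hnx hs' (by have := hdec hN; omega)

theorem pvSeed_inv (maps : List String) (row col : Int) (src : Int × Int) :
    (∀ p, p ∈ pvSeedB maps row col src ↔
      (pvW maps row col src (0+1) p ∧ ¬ pvSn maps row col src 0 p)) ∧
    (∀ p, p ∈ PySem.Set.ofList (pvSeedB maps row col src) ↔ pvSn maps row col src (0+1) p) := by
  have hw1 : ∀ p, pvW maps row col src 1 p ↔ pvOpn maps row col p ∧ pvAdj src p := by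
    intro p
    constructor
    · rintro ⟨hop, q, hq, hadj⟩
      cases hq
      exact ⟨hop, hadj⟩
    · rintro ⟨hop, hadj⟩
      exact ⟨hop, src, rfl, hadj⟩
  constructor
  · intro p
    rw [pvSeedB_mem, pvSn_zero]
    rw [show (0+1 : Nat) = 1 from rfl, hw1]
    tauto
  · intro p
    rw [PySem.Set.mem_ofList, pvSeedB_mem]
    constructor
    · rintro ⟨hop, hadj⟩
      exact ⟨1, by omega, by omega, (hw1 p).mpr ⟨hop, hadj⟩⟩
    · rintro ⟨j, hj1, hj2, hwj⟩
      have : j = 1 := by omega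
      subst this
      exact (hw1 p).mp hwj

theorem pvDistB_found (maps : List String) (row col : Int) (src : Int × Int) (target : Char)
    (D : Nat) (hD : pvHas maps row col src target D) (hD1 : 1 ≤ D)
    (hDmin : ∀ j, 1 ≤ j → j < D → ¬ pvHas maps row col src target j) :
    pvDistB maps row col src target = some (D:Int) := by
  obtain ⟨hf, hs⟩ := pvSeed_inv maps row col src
  have h := pvLoopB_found maps row col target src D hD hD1 hDmin
    (2 * (row.toNat * col.toNat) + 13) (pvSeedB maps row col src)
    (PySem.Set.ofList (pvSeedB maps row col src)) 0 hf hs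
    (by intro j h1 h2 _; omega)
    (by have := pvUnseenB_le row col (PySem.Set.ofList (pvSeedB maps row col src)); omega)
  rw [pvDistB]
  simpa using h

theorem pvDistB_none (maps : List String) (row col : Int) (src : Int × Int) (target : Char)
    (hnone : ∀ j, 1 ≤ j → ¬ pvHas maps row col src target j) :
    pvDistB maps row col src target = none := by
  obtain ⟨hf, hs⟩ := pvSeed_inv maps row col src
  have h := pvLoopB_none maps row col target src hnone
    (2 * (row.toNat * col.toNat) + 13) (pvSeedB maps row col src)
    (PySem.Set.ofList (pvSeedB maps row col src)) 0 hf hs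
    (by have := pvUnseenB_le row col (PySem.Set.ofList (pvSeedB maps row col src)); omega)
  rw [pvDistB]
  simpa using h

-- decimal digit list of a natural, as core's Nat.toDigits 10 produces it
def pvDigSpec (n : Nat) : List Char :=
  if h : n < 10 then [Nat.digitChar n]
  else pvDigSpec (n / 10) ++ [Nat.digitChar (n % 10)]
  decreasing_by exact Nat.div_lt_self (by omega) (by omega)

theorem pvToDigitsCore_eq (fuel : Nat) : ∀ n acc, n < fuel →
    Nat.toDigitsCore 10 fuel n acc = pvDigSpec n ++ acc := by
  induction fuel with
  | zero => intro n acc h; omega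
  | succ fuel ih =>
    intro n acc h
    rw [Nat.toDigitsCore]
    by_cases h10 : n < 10
    · simp only [Nat.div_eq_of_lt h10, if_pos rfl]
      rw [pvDigSpec, dif_pos h10, Nat.mod_eq_of_lt h10]; rfl
    · have hne : n / 10 ≠ 0 := by omega
      simp only [if_neg hne]
      rw [ih (n/10) _ (by omega)]
      conv_rhs => rw [pvDigSpec]
      rw [dif_neg h10]
      simp
theorem pvToDigits_eq (n : Nat) : Nat.toDigits 10 n = pvDigSpec n := by
  rw [Nat.toDigits, pvToDigitsCore_eq (n+1) n [] (by omega)]; simp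

theorem pvDigSpec_ne_nil (n : Nat) : pvDigSpec n ≠ [] := by
  rw [pvDigSpec]; split <;> simp

theorem pvDigitChar_inj : ∀ m < 10, ∀ n < 10, Nat.digitChar m = Nat.digitChar n → m = n := by decide

theorem pvDigitChar_ne_comma : ∀ m < 10, Nat.digitChar m ≠ ',' := by decide

theorem pvDigSpec_no_comma (n : Nat) : ',' ∉ pvDigSpec n := by
  induction n using Nat.strong_induction_on with
  | _ n ih =>
    rw [pvDigSpec]
    split
    · next h => simp [Ne.symm (pvDigitChar_ne_comma n h)]
    · next h =>
      simp only [List.mem_append, List.mem_singleton, not_or]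
      refine ⟨ih (n/10) (Nat.div_lt_self (by omega) (by omega)), ?_⟩
      exact fun hcontra => pvDigitChar_ne_comma (n % 10) (Nat.mod_lt _ (by omega)) hcontra.symm

theorem pvDigSpec_lt {n : Nat} (h : n < 10) : pvDigSpec n = [Nat.digitChar n] := by
  rw [pvDigSpec]; simp [h]

theorem pvDigSpec_ge {n : Nat} (h : ¬ n < 10) :
    pvDigSpec n = pvDigSpec (n / 10) ++ [Nat.digitChar (n % 10)] := by
  rw [pvDigSpec]; simp [h]

theorem pvDigSpec_inj : ∀ m n : Nat, pvDigSpec m = pvDigSpec n → m = n := by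
  intro m
  induction m using Nat.strong_induction_on with
  | _ m ih =>
    intro n h
    by_cases hm : m < 10 <;> by_cases hn : n < 10
    · rw [pvDigSpec_lt hm, pvDigSpec_lt hn] at h
      exact pvDigitChar_inj m hm n hn (by simpa using h)
    · rw [pvDigSpec_lt hm, pvDigSpec_ge hn] at h
      exfalso
      have hlen := congrArg List.length h
      have := pvDigSpec_ne_nil (n / 10)
      cases hds : pvDigSpec (n/10) <;> simp [hds] at hlen this
    · rw [pvDigSpec_ge hm, pvDigSpec_lt hn] at h
      exfalso
      have hlen := congrArg List.length h
      have := pvDigSpec_ne_nil (m / 10)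
      cases hds : pvDigSpec (m/10) <;> simp [hds] at hlen this
    · rw [pvDigSpec_ge hm, pvDigSpec_ge hn] at h
      have h2 := List.append_inj' h (by simp)
      obtain ⟨h3, h4⟩ := h2
      have hdiv := ih (m/10) (Nat.div_lt_self (by omega) (by omega)) (n/10) h3
      have hmod : m % 10 = n % 10 := by
        refine pvDigitChar_inj _ (Nat.mod_lt _ (by omega)) _ (Nat.mod_lt _ (by omega)) ?_
        simpa using h4
      omega

theorem pvCommaSplit : ∀ (a a' b b' : List Char), ',' ∉ a → ',' ∉ a' →
    a ++ ',' :: b = a' ++ ',' :: b' → a = a' ∧ b = b' := by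
  intro a
  induction a with
  | nil => intro a' b b' _ ha' h
           cases a' with
           | nil => simpa using h
           | cons x t => simp at h; obtain ⟨hx, -⟩ := h; simp [← hx] at ha'
  | cons x t ih =>
    intro a' b b' ha ha' h
    cases a' with
    | nil => simp at h; obtain ⟨hx, -⟩ := h; simp [hx] at ha
    | cons y t' =>
      simp at h
      obtain ⟨hxy, hrest⟩ := h
      have := ih t' b b' (by simp at ha; exact ha.2) (by simp at ha'; exact ha'.2) hrest
      exact ⟨by simp [hxy, this.1], this.2⟩

theorem pvKey_inj {r c r' c' : Int} (hr : 0 ≤ r) (hc : 0 ≤ c) (hr' : 0 ≤ r') (hc' : 0 ≤ c')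
    (h : pvKey r c = pvKey r' c') : r = r' ∧ c = c' := by
  unfold pvKey PySem.Int.toChars at h
  rw [if_neg (by omega), if_neg (by omega), if_neg (by omega), if_neg (by omega)] at h
  rw [pvToDigits_eq, pvToDigits_eq, pvToDigits_eq, pvToDigits_eq] at h
  have := pvCommaSplit _ _ _ _ (pvDigSpec_no_comma _) (pvDigSpec_no_comma _) h
  have h1 := pvDigSpec_inj _ _ this.1
  have h2 := pvDigSpec_inj _ _ this.2
  omega

-- ==== A-side analysis ====

def pvPushA (maps : List String) (row col : Int)
    (st : List ((Int × Int) × Int) × PySem.Dict (List Char) Int) (nb : Int × Int) (s : Int) :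
    List ((Int × Int) × Int) × PySem.Dict (List Char) Int :=
  if 0 ≤ nb.1 ∧ nb.1 < row ∧ 0 ≤ nb.2 ∧ nb.2 < col ∧ pvCell maps nb.1 nb.2 ≠ 'X' ∧
      st.2.getD (pvKey nb.1 nb.2) 0 = 0 then
    (st.1 ++ [(nb, s + 1)], st.2.modify (pvKey nb.1 nb.2) 0 (· + 1))
  else st

theorem pvBr1_eq (maps : List String) (row col : Int) (r c step : Int)
    (st : List ((Int × Int) × Int) × PySem.Dict (List Char) Int)
    (h : pvOpn maps row col (r, c)) :
    pvBr1 maps row col r c step st = pvPushA maps row col st (r+1, c) step := by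
  obtain ⟨h1, h2, h3, h4, h5⟩ := h
  rw [pvBr1, pvPushA]
  by_cases hc : r + 1 < row ∧ pvCell maps (r+1) c ≠ 'X' ∧ st.2.getD (pvKey (r+1) c) 0 = 0
  · rw [if_pos hc, if_pos ⟨by simp; omega, by simpa using hc.1, by simpa using h3,
      by simpa using h4, by simpa using hc.2.1, by simpa using hc.2.2⟩]
  · rw [if_neg hc, if_neg (fun hx => hc ⟨by simpa using hx.2.1, by simpa using hx.2.2.2.2.1,
      by simpa using hx.2.2.2.2.2⟩)]

theorem pvBr2_eq (maps : List String) (row col : Int) (r c step : Int)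
    (st : List ((Int × Int) × Int) × PySem.Dict (List Char) Int)
    (h : pvOpn maps row col (r, c)) :
    pvBr2 maps row col r c step st = pvPushA maps row col st (r-1, c) step := by
  obtain ⟨h1, h2, h3, h4, h5⟩ := h
  rw [pvBr2, pvPushA]
  by_cases hc : r - 1 > -1 ∧ pvCell maps (r-1) c ≠ 'X' ∧ st.2.getD (pvKey (r-1) c) 0 = 0
  · rw [if_pos hc, if_pos ⟨by simp at hc ⊢; omega, by simp at h2 ⊢; omega, by simpa using h3,
      by simpa using h4, by simpa using hc.2.1, by simpa using hc.2.2⟩]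
  · rw [if_neg hc, if_neg (fun hx => hc ⟨by have := hx.1; simp at this ⊢; omega,
      by simpa using hx.2.2.2.2.1, by simpa using hx.2.2.2.2.2⟩)]

theorem pvBr3_eq (maps : List String) (row col : Int) (r c step : Int)
    (st : List ((Int × Int) × Int) × PySem.Dict (List Char) Int)
    (h : pvOpn maps row col (r, c)) :
    pvBr3 maps row col r c step st = pvPushA maps row col st (r, c+1) step := by
  obtain ⟨h1, h2, h3, h4, h5⟩ := h
  rw [pvBr3, pvPushA]
  by_cases hc : c + 1 < col ∧ pvCell maps r (c+1) ≠ 'X' ∧ st.2.getD (pvKey r (c+1)) 0 = 0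
  · rw [if_pos hc, if_pos ⟨by simpa using h1, by simpa using h2, by simp; omega,
      by simpa using hc.1, by simpa using hc.2.1, by simpa using hc.2.2⟩]
  · rw [if_neg hc, if_neg (fun hx => hc ⟨by simpa using hx.2.2.2.1, by simpa using hx.2.2.2.2.1,
      by simpa using hx.2.2.2.2.2⟩)]

theorem pvBr4_eq (maps : List String) (row col : Int) (r c step : Int)
    (st : List ((Int × Int) × Int) × PySem.Dict (List Char) Int)
    (h : pvOpn maps row col (r, c)) :
    pvBr4 maps row col r c step st = pvPushA maps row col st (r, c-1) step := by
  obtain ⟨h1, h2, h3, h4, h5⟩ := h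
  rw [pvBr4, pvPushA]
  by_cases hc : c - 1 > -1 ∧ pvCell maps r (c-1) ≠ 'X' ∧ st.2.getD (pvKey r (c-1)) 0 = 0
  · rw [if_pos hc, if_pos ⟨by simpa using h1, by simpa using h2, by have := hc.1; simp at this ⊢; omega,
      by simp at h4 ⊢; omega, by simpa using hc.2.1, by simpa using hc.2.2⟩]
  · rw [if_neg hc, if_neg (fun hx => hc ⟨by have := hx.2.2.1; simp at this ⊢; omega,
      by simpa using hx.2.2.2.2.1, by simpa using hx.2.2.2.2.2⟩)]

-- what one loop round adds: `news` = the cells enqueued (and freshly marked) this round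
def pvExtA (maps : List String) (row col : Int)
    (st st' : List ((Int × Int) × Int) × PySem.Dict (List Char) Int)
    (s : Int) (cur : Int × Int) (news : List (Int × Int)) : Prop :=
  st'.1 = st.1 ++ news.map (fun p => (p, s + 1)) ∧
  (∀ p ∈ news, pvOpn maps row col p ∧ pvAdj cur p) ∧
  (∀ p ∈ news, st'.2.getD (pvKey p.1 p.2) 0 ≠ 0) ∧
  (∀ q : Int × Int, 0 ≤ q.1 → 0 ≤ q.2 → q ∉ news →
    st'.2.getD (pvKey q.1 q.2) 0 = st.2.getD (pvKey q.1 q.2) 0)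

theorem pvExtA_refl (maps : List String) (row col : Int)
    (st : List ((Int × Int) × Int) × PySem.Dict (List Char) Int) (s : Int) (cur : Int × Int) :
    pvExtA maps row col st st s cur [] := by
  refine ⟨by simp, by simp, by simp, by intro q _ _ _; rfl⟩

theorem pvOpn_nonneg (maps : List String) (row col : Int) (p : Int × Int)
    (h : pvOpn maps row col p) : 0 ≤ p.1 ∧ 0 ≤ p.2 := ⟨h.1, h.2.2.1⟩

theorem pvExtA_push (maps : List String) (row col : Int)
    (st st1 : List ((Int × Int) × Int) × PySem.Dict (List Char) Int)
    (s : Int) (cur : Int × Int) (news : List (Int × Int))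
    (h : pvExtA maps row col st st1 s cur news) (nb : Int × Int) (hadj : pvAdj cur nb) :
    ∃ news', news' ⊆ news ++ [nb] ∧ news ⊆ news' ∧
      pvExtA maps row col st (pvPushA maps row col st1 nb s) s cur news' ∧
      (pvOpn maps row col nb → st.2.getD (pvKey nb.1 nb.2) 0 = 0 → nb ∈ news') := by
  obtain ⟨h1, h2, h3, h4⟩ := h
  by_cases hfire : 0 ≤ nb.1 ∧ nb.1 < row ∧ 0 ≤ nb.2 ∧ nb.2 < col ∧ pvCell maps nb.1 nb.2 ≠ 'X' ∧
      st1.2.getD (pvKey nb.1 nb.2) 0 = 0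
  · refine ⟨news ++ [nb], by simp, by simp, ⟨?_, ?_, ?_, ?_⟩, fun _ _ => by simp⟩
    · rw [pvPushA, if_pos hfire]
      simp [h1]
    · intro p hp
      rcases List.mem_append.mp hp with hp | hp
      · exact h2 p hp
      · rw [List.mem_singleton.mp hp]
        exact ⟨⟨hfire.1, hfire.2.1, hfire.2.2.1, hfire.2.2.2.1, hfire.2.2.2.2.1⟩, hadj⟩
    · intro p hp
      rw [pvPushA, if_pos hfire]
      simp only
      by_cases hkey : pvKey p.1 p.2 = pvKey nb.1 nb.2
      · rw [hkey, PySem.Dict.getD_modify_self]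
        omega
      · rw [PySem.Dict.getD_modify_of_ne _ _ _ hkey]
        rcases List.mem_append.mp hp with hp | hp
        · exact h3 p hp
        · exact absurd (congrArg (fun p => pvKey p.1 p.2) (List.mem_singleton.mp hp)) hkey
    · intro q hq1 hq2 hq
      rw [pvPushA, if_pos hfire]
      simp only
      have hqnb : q ≠ nb := fun he => hq (by simp [he])
      have hkey : pvKey q.1 q.2 ≠ pvKey nb.1 nb.2 := by
        intro hk
        obtain ⟨e1, e2⟩ := pvKey_inj hq1 hq2 hfire.1 hfire.2.2.1 hk
        exact hqnb (Prod.ext e1 e2)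
      rw [PySem.Dict.getD_modify_of_ne _ _ _ hkey]
      exact h4 q hq1 hq2 (fun hmem => hq (by simp [hmem]))
  · have hnof : pvPushA maps row col st1 nb s = st1 := by
      rw [pvPushA, if_neg hfire]
    refine ⟨news, by simp, by simp, by rw [hnof]; exact ⟨h1, h2, h3, h4⟩, ?_⟩
    intro hop hun
    by_contra hmem
    have hnn := pvOpn_nonneg maps row col nb hop
    have := h4 nb hnn.1 hnn.2 hmem
    exact hfire ⟨hop.1, hop.2.1, hop.2.2.1, hop.2.2.2.1, hop.2.2.2.2, by omega⟩

def pvUnmarkA (row col : Int) (cnt : PySem.Dict (List Char) Int) : Nat :=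
  ((pvGrid row col).filter (fun p => cnt.getD (pvKey p.1 p.2) 0 = 0)).card

theorem pvPushA_measure (maps : List String) (row col : Int)
    (st : List ((Int × Int) × Int) × PySem.Dict (List Char) Int) (nb : Int × Int) (s : Int) :
    (pvPushA maps row col st nb s).1.length + pvUnmarkA row col (pvPushA maps row col st nb s).2 =
      st.1.length + pvUnmarkA row col st.2 := by
  by_cases hfire : 0 ≤ nb.1 ∧ nb.1 < row ∧ 0 ≤ nb.2 ∧ nb.2 < col ∧ pvCell maps nb.1 nb.2 ≠ 'X' ∧
      st.2.getD (pvKey nb.1 nb.2) 0 = 0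
  · rw [pvPushA, if_pos hfire]
    simp only [List.length_append, List.length_singleton]
    have hmem : nb ∈ (pvGrid row col).filter (fun p => st.2.getD (pvKey p.1 p.2) 0 = 0) := by
      rw [Finset.mem_filter]
      exact ⟨(pvGrid_mem row col nb).mpr ⟨hfire.1, hfire.2.1, hfire.2.2.1, hfire.2.2.2.1⟩,
        by simpa using hfire.2.2.2.2.2⟩
    have hset : (pvGrid row col).filter
        (fun p => (st.2.modify (pvKey nb.1 nb.2) 0 (· + 1)).getD (pvKey p.1 p.2) 0 = 0) =
        ((pvGrid row col).filter (fun p => st.2.getD (pvKey p.1 p.2) 0 = 0)).erase nb := by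
      ext p
      rw [Finset.mem_erase, Finset.mem_filter, Finset.mem_filter]
      constructor
      · rintro ⟨hg, hz⟩
        have hpnb : p ≠ nb := by
          intro he
          subst he
          rw [PySem.Dict.getD_modify_self] at hz
          omega
        have hkey : pvKey p.1 p.2 ≠ pvKey nb.1 nb.2 := by
          intro hk
          have hgb := (pvGrid_mem row col p).mp hg
          obtain ⟨e1, e2⟩ := pvKey_inj hgb.1 hgb.2.2.1 hfire.1 hfire.2.2.1 hk
          exact hpnb (Prod.ext e1 e2)
        rw [PySem.Dict.getD_modify_of_ne _ _ _ hkey] at hz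
        exact ⟨hpnb, hg, hz⟩
      · rintro ⟨hpnb, hg, hz⟩
        have hkey : pvKey p.1 p.2 ≠ pvKey nb.1 nb.2 := by
          intro hk
          have hgb := (pvGrid_mem row col p).mp hg
          obtain ⟨e1, e2⟩ := pvKey_inj hgb.1 hgb.2.2.1 hfire.1 hfire.2.2.1 hk
          exact hpnb (Prod.ext e1 e2)
        refine ⟨hg, ?_⟩
        rw [PySem.Dict.getD_modify_of_ne _ _ _ hkey]
        exact hz
    rw [pvUnmarkA, pvUnmarkA]
    rw [hset, Finset.card_erase_of_mem hmem]
    have hpos : 0 < ((pvGrid row col).filter (fun p => st.2.getD (pvKey p.1 p.2) 0 = 0)).card :=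
      Finset.card_pos.mpr ⟨nb, hmem⟩
    omega
  · rw [pvPushA, if_neg hfire]

theorem pvMono_head (queue : List ((Int × Int) × Int)) (e : (Int × Int) × Int)
    (rest : List ((Int × Int) × Int))
    (hM : ∃ u : Nat, ∃ q1 q2, queue = q1 ++ q2 ∧ (∀ e' ∈ q1, e'.2 = (u:Int)+1) ∧
      (∀ e' ∈ q2, e'.2 = (u:Int)+2))
    (hq : queue = e :: rest) :
    ∃ u : Nat, e.2 = (u:Int)+1 ∧ ∃ q1 q2, rest = q1 ++ q2 ∧ (∀ e' ∈ q1, e'.2 = (u:Int)+1) ∧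
      (∀ e' ∈ q2, e'.2 = (u:Int)+2) := by
  obtain ⟨u, q1, q2, hsplit, h1, h2⟩ := hM
  subst hq
  cases q1 with
  | nil =>
    rw [List.nil_append] at hsplit
    refine ⟨u+1, ?_, rest, [], by simp, ?_, by simp⟩
    · have he : e ∈ q2 := by rw [← hsplit]; simp
      have := h2 e he
      push_cast
      omega
    · intro e' he'
      have hee : e' ∈ q2 := by rw [← hsplit]; simp [he']
      have := h2 e' hee
      push_cast
      omega
  | cons f t =>
    rw [List.cons_append] at hsplit
    injection hsplit with he hrest
    refine ⟨u, by rw [he]; exact h1 f (by simp), t, q2, hrest, fun e' he' => h1 e' (by simp [he']), h2⟩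

theorem pvIterA (maps : List String) (row col : Int) (r c s : Int)
    (rest : List ((Int × Int) × Int)) (cnt : PySem.Dict (List Char) Int)
    (hopn : pvOpn maps row col (r, c)) :
    ∃ news, pvExtA maps row col (rest, cnt)
        (pvBr4 maps row col r c s (pvBr3 maps row col r c s
          (pvBr2 maps row col r c s (pvBr1 maps row col r c s (rest, cnt))))) s (r, c) news ∧
      (∀ nb, pvAdj (r, c) nb → pvOpn maps row col nb →
        cnt.getD (pvKey nb.1 nb.2) 0 = 0 → nb ∈ news) ∧
      (pvBr4 maps row col r c s (pvBr3 maps row col r c s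
          (pvBr2 maps row col r c s (pvBr1 maps row col r c s (rest, cnt))))).1.length +
        pvUnmarkA row col (pvBr4 maps row col r c s (pvBr3 maps row col r c s
          (pvBr2 maps row col r c s (pvBr1 maps row col r c s (rest, cnt))))).2 =
        rest.length + pvUnmarkA row col cnt := by
  rw [pvBr1_eq maps row col r c s _ hopn]
  rw [pvBr2_eq maps row col r c s _ hopn]
  rw [pvBr3_eq maps row col r c s _ hopn]
  rw [pvBr4_eq maps row col r c s _ hopn]
  obtain ⟨n1, hs1, hm1, he1, hf1⟩ := pvExtA_push maps row col (rest, cnt) (rest, cnt) s (r, c) []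
    (pvExtA_refl maps row col (rest, cnt) s (r, c)) (r+1, c) (Or.inl rfl)
  obtain ⟨n2, hs2, hm2, he2, hf2⟩ := pvExtA_push maps row col (rest, cnt) _ s (r, c) n1
    he1 (r-1, c) (Or.inr (Or.inl rfl))
  obtain ⟨n3, hs3, hm3, he3, hf3⟩ := pvExtA_push maps row col (rest, cnt) _ s (r, c) n2
    he2 (r, c+1) (Or.inr (Or.inr (Or.inl rfl)))
  obtain ⟨n4, hs4, hm4, he4, hf4⟩ := pvExtA_push maps row col (rest, cnt) _ s (r, c) n3
    he3 (r, c-1) (Or.inr (Or.inr (Or.inr rfl)))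
  refine ⟨n4, he4, ?_, ?_⟩
  · intro nb hadj hop hun
    rcases hadj with rfl | rfl | rfl | rfl
    · exact hm4 (hm3 (hm2 (hf1 hop (by simpa using hun))))
    · exact hm4 (hm3 (hf2 hop (by simpa using hun)))
    · exact hm4 (hf3 hop (by simpa using hun))
    · exact hf4 hop (by simpa using hun)
  · rw [pvPushA_measure, pvPushA_measure, pvPushA_measure, pvPushA_measure]

theorem pvLoopA_none (maps : List String) (row col : Int) (target : Char) (src : Int × Int)
    (hnone : ∀ j, 1 ≤ j → ¬ pvHas maps row col src target j) :
    ∀ fuel (queue : List ((Int × Int) × Int)) (cnt : PySem.Dict (List Char) Int),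
    (∀ e ∈ queue, ∃ k : Nat, e.2 = (k:Int)+1 ∧ pvW maps row col src (k+1) e.1) →
    pvLoopA maps row col target fuel queue cnt = 0 := by
  intro fuel
  induction fuel with
  | zero => intro queue cnt _; rw [pvLoopA]
  | succ fuel ih =>
    intro queue cnt hSound
    cases queue with
    | nil => rw [pvLoopA]
    | cons e rest =>
      obtain ⟨⟨r, c⟩, step⟩ := e
      obtain ⟨k, hstep, hW⟩ := hSound ((r,c), step) (by simp)
      have hopn := pvOpn_of_W maps row col src (r,c) (by omega) hW
      have hcell : ¬ (pvCell maps r c = target) := by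
        intro hc
        exact hnone (k+1) (by omega) ⟨(r,c), hW, hc⟩
      rw [pvLoopA, if_neg hcell]
      obtain ⟨news, hext, -, -⟩ := pvIterA maps row col r c step rest cnt hopn
      apply ih
      intro e' he'
      rw [hext.1] at he'
      rcases List.mem_append.mp he' with he' | he'
      · exact hSound e' (by simp [he'])
      · obtain ⟨p, hp, rfl⟩ := List.mem_map.mp he'
        obtain ⟨hpo, hpadj⟩ := hext.2.1 p hp
        exact ⟨k+1, by push_cast; omega, ⟨hpo, (r,c), hW, hpadj⟩⟩

theorem pvLoopA_found (maps : List String) (row col : Int) (target : Char) (src : Int × Int)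
    (ws : List (Int × Int)) (hgood : pvGoodWs maps row col src target ws)
    (hnodup : ∀ i j (hi : i < ws.length) (hj : j < ws.length), ws[i] = ws[j] → i = j)
    (hHasmin : ∀ j, 1 ≤ j → j < ws.length → ¬ pvHas maps row col src target j) :
    ∀ fuel (queue : List ((Int × Int) × Int)) (cnt : PySem.Dict (List Char) Int),
    (∀ e ∈ queue, ∃ k : Nat, e.2 = (k:Int)+1 ∧ pvW maps row col src (k+1) e.1) →
    (∃ u : Nat, ∃ q1 q2, queue = q1 ++ q2 ∧ (∀ e ∈ q1, e.2 = (u:Int)+1) ∧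
      (∀ e ∈ q2, e.2 = (u:Int)+2)) →
    (∃ i, ∃ (hi : i < ws.length), (∃ s : Nat, s ≤ i ∧ ((ws[i], (s:Int)+1) ∈ queue)) ∧
      (∀ j, i < j → ∀ (hj : j < ws.length), cnt.getD (pvKey (ws[j]).1 (ws[j]).2) 0 = 0)) →
    (queue.length + pvUnmarkA row col cnt + 1 ≤ fuel) →
    pvLoopA maps row col target fuel queue cnt = ((ws.length : Nat) : Int) := by
  intro fuel
  induction fuel with
  | zero => intro queue cnt _ _ _ hfuel; omega
  | succ fuel ih =>
    intro queue cnt hSound hMono hWit hfuel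
    cases hq : queue with
    | nil =>
      obtain ⟨i, hi, ⟨s, hsi, hsmem⟩, -⟩ := hWit
      rw [hq] at hsmem
      simp at hsmem
    | cons e rest =>
      subst hq
      obtain ⟨⟨r, c⟩, step⟩ := e
      obtain ⟨u, hstep, q1, q2, hrest, hq1, hq2⟩ :=
        pvMono_head _ ((r,c), step) rest hMono rfl
      obtain ⟨k, hstepk, hWcur0⟩ := hSound ((r,c), step) (by simp)
      have hstep' : step = (u:Int)+1 := hstep
      have hstepk' : step = (k:Int)+1 := hstepk
      have hku : k = u := by rw [hstep'] at hstepk'; exact_mod_cast by omega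
      have hWcur : pvW maps row col src (u+1) (r, c) := by rw [← hku]; exact hWcur0
      have hopn := pvOpn_of_W maps row col src (r,c) (by omega) hWcur
      obtain ⟨i, hi, ⟨s, hsi, hsmem⟩, hbeyond⟩ := hWit
      -- the witness entry's step is at least the head's
      have hus : u ≤ s := by
        rcases List.mem_cons.mp hsmem with hhd | htl
        · have h2 : (s:Int)+1 = step := congrArg Prod.snd hhd
          rw [hstep'] at h2
          exact_mod_cast by omega
        · rw [hrest] at htl
          rcases List.mem_append.mp htl with h | h
          · have := hq1 _ h
            simp at this
            exact_mod_cast by omega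
          · have := hq2 _ h
            simp at this
            exact_mod_cast by omega
      by_cases hcell : pvCell maps r c = target
      · rw [pvLoopA, if_pos hcell, hstep']
        have hHasU : pvHas maps row col src target (u+1) := ⟨(r,c), hWcur, hcell⟩
        have h1 : ws.length ≤ u + 1 := by
          by_contra hlt
          exact hHasmin (u+1) (by omega) (by omega) hHasU
        have h2 : u + 1 ≤ ws.length := by omega
        have : u + 1 = ws.length := by omega
        rw [← this]
        push_cast
        ring
      · rw [pvLoopA, if_neg hcell]
        show pvLoopA maps row col target fuel
          (pvBr4 maps row col r c step (pvBr3 maps row col r c step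
            (pvBr2 maps row col r c step (pvBr1 maps row col r c step (rest, cnt))))).1
          (pvBr4 maps row col r c step (pvBr3 maps row col r c step
            (pvBr2 maps row col r c step (pvBr1 maps row col r c step (rest, cnt))))).2 = _
        obtain ⟨news, hext, hfire, hmeas⟩ := pvIterA maps row col r c step rest cnt hopn
        obtain ⟨hq', hnews, hmarked, hunch⟩ := hext
        -- sound
        have hSound' : ∀ e ∈ (pvBr4 maps row col r c step (pvBr3 maps row col r c step
            (pvBr2 maps row col r c step (pvBr1 maps row col r c step (rest, cnt))))).1,
            ∃ k : Nat, e.2 = (k:Int)+1 ∧ pvW maps row col src (k+1) e.1 := by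
          intro e' he'
          rw [hq'] at he'
          rcases List.mem_append.mp he' with he' | he'
          · exact hSound e' (by simp [he'])
          · obtain ⟨p, hp, rfl⟩ := List.mem_map.mp he'
            obtain ⟨hpo, hpadj⟩ := hnews p hp
            exact ⟨u+1, by rw [hstep']; push_cast; ring, ⟨hpo, (r,c), hWcur, hpadj⟩⟩
        -- mono
        have hMono' : ∃ u' : Nat, ∃ r1 r2, (pvBr4 maps row col r c step (pvBr3 maps row col r c step
            (pvBr2 maps row col r c step (pvBr1 maps row col r c step (rest, cnt))))).1 = r1 ++ r2 ∧
            (∀ e ∈ r1, e.2 = (u':Int)+1) ∧ (∀ e ∈ r2, e.2 = (u':Int)+2) := by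
          refine ⟨u, q1, q2 ++ news.map (fun p => (p, step + 1)), ?_, hq1, ?_⟩
          · rw [hq', hrest, List.append_assoc]
          · intro e' he'
            rcases List.mem_append.mp he' with he' | he'
            · exact hq2 e' he'
            · obtain ⟨p, hp, rfl⟩ := List.mem_map.mp he'
              simp [hstep']
              ring
        -- witness
        have hwitcons : (∃ j, i < j ∧ ∃ (hj : j < ws.length), ws[j] ∈ news) →
            (∃ i', ∃ (hi' : i' < ws.length),
              (∃ s' : Nat, s' ≤ i' ∧ ((ws[i'], (s':Int)+1) ∈ (pvBr4 maps row col r c step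
                (pvBr3 maps row col r c step (pvBr2 maps row col r c step
                  (pvBr1 maps row col r c step (rest, cnt))))).1)) ∧
              (∀ j, i' < j → ∀ (hj : j < ws.length),
                (pvBr4 maps row col r c step (pvBr3 maps row col r c step
                  (pvBr2 maps row col r c step (pvBr1 maps row col r c step
                    (rest, cnt))))).2.getD (pvKey (ws[j]).1 (ws[j]).2) 0 = 0)) := by
          classical
          rintro ⟨j0, hij0, hj0, hmem0⟩
          set P : Nat → Prop := fun j => i < j ∧ ∃ (hj : j < ws.length), ws[j] ∈ news with hP
          have hPj0 : P j0 := ⟨hij0, hj0, hmem0⟩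
          have hspec := Nat.findGreatest_spec (P := P) (m := j0) (n := ws.length) (by omega) hPj0
          obtain ⟨hilt, hjlt, hmemJ⟩ := hspec
          refine ⟨Nat.findGreatest P ws.length, hjlt, ⟨u+1, by omega, ?_⟩, ?_⟩
          · rw [hq']
            apply List.mem_append_right
            apply List.mem_map.mpr
            refine ⟨ws[Nat.findGreatest P ws.length], hmemJ, ?_⟩
            rw [hstep']
            push_cast
            ring_nf
          · intro j hgt hj
            have hnot : ws[j] ∉ news := by
              intro hmem
              exact Nat.findGreatest_is_greatest hgt (by omega) ⟨by omega, hj, hmem⟩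
            have hop := hgood.2.1 j hj
            rw [hunch (ws[j]) hop.1 hop.2.2.1 hnot]
            exact hbeyond j (by omega) hj
        by_cases hwhead : (ws[i], (s:Int)+1) ∈ rest
        · by_cases hJ : ∃ j, i < j ∧ ∃ (hj : j < ws.length), ws[j] ∈ news
          · exact ih _ _ hSound' hMono' (hwitcons hJ) (by
              have : rest.length + 1 = (((r,c),step) :: rest).length := by simp
              omega)
          · refine ih _ _ hSound' hMono' ⟨i, hi, ⟨s, hsi, ?_⟩, ?_⟩ (by
              have : rest.length + 1 = (((r,c),step) :: rest).length := by simp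
              omega)
            · rw [hq']
              exact List.mem_append_left _ hwhead
            · intro j hgt hj
              have hnot : ws[j] ∉ news := fun hmem => hJ ⟨j, hgt, hj, hmem⟩
              have hop := hgood.2.1 j hj
              rw [hunch (ws[j]) hop.1 hop.2.2.1 hnot]
              exact hbeyond j hgt hj
        · -- the dequeued head is the witness entry
          have hhd : ((ws[i], (s:Int)+1) : (Int × Int) × Int) = ((r,c), step) := by
            rcases List.mem_cons.mp hsmem with h | h
            · exact h
            · exact absurd h hwhead
          have hwsi : ws[i] = (r, c) := congrArg Prod.fst hhd
          have hsu : s = u := by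
            have h2 : (s:Int)+1 = step := congrArg Prod.snd hhd
            rw [hstep'] at h2
            exact_mod_cast by omega
          have hine : i + 1 < ws.length := by
            rcases Nat.lt_or_ge (i+1) ws.length with h | h
            · exact h
            · exfalso
              have hieq : ws.length - 1 = i := by omega
              have hl := hgood.2.2.2.2 (by omega)
              simp only [hieq] at hl
              rw [hwsi] at hl
              exact hcell hl
          have hnb : ws[i+1] ∈ news := by
            apply hfire
            · rw [← hwsi]
              exact hgood.2.2.2.1 i hine
            · exact hgood.2.1 (i+1) hine
            · exact hbeyond (i+1) (by omega) hine
          exact ih _ _ hSound' hMono' (hwitcons ⟨i+1, by omega, hine, hnb⟩) (by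
            have : rest.length + 1 = (((r,c),step) :: rest).length := by simp
            omega)
theorem pvS1a_eq (maps : List String) (row col : Int) (s0 s1 : Int)
    (st : List ((Int × Int) × Int) × PySem.Dict (List Char) Int)
    (hs0 : 0 ≤ s0) (hs0r : s0 < row) (hs1 : 0 ≤ s1) (hs1c : s1 < col) :
    pvS1a maps row col s0 s1 st =
      if 0 ≤ ((s0+1, s1) : Int × Int).1 ∧ ((s0+1, s1) : Int × Int).1 < row ∧ 0 ≤ ((s0+1, s1) : Int × Int).2 ∧
          ((s0+1, s1) : Int × Int).2 < col ∧ pvCell maps ((s0+1, s1) : Int × Int).1 ((s0+1, s1) : Int × Int).2 ≠ 'X' then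
        (st.1 ++ [(((s0+1, s1) : Int × Int), 1)], st.2.modify (pvKey (s0+1) s1) 0 (· + 1)) else st := by
  rw [pvS1a]
  by_cases hc : s0 + 1 < row ∧ pvCell maps (s0+1) s1 ≠ 'X'
  · rw [if_pos hc, if_pos ⟨by simp; omega, by simpa using hc.1, by simpa using hs1, by simpa using hs1c, by simpa using hc.2⟩]
  · rw [if_neg hc, if_neg (fun hx => hc ⟨by simpa using hx.2.1, by simpa using hx.2.2.2.2⟩)]

theorem pvS1b_eq (maps : List String) (row col : Int) (s0 s1 : Int)
    (st : List ((Int × Int) × Int) × PySem.Dict (List Char) Int)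
    (hs0 : 0 ≤ s0) (hs0r : s0 < row) (hs1 : 0 ≤ s1) (hs1c : s1 < col) :
    pvS1b maps row col s0 s1 st =
      if 0 ≤ ((s0-1, s1) : Int × Int).1 ∧ ((s0-1, s1) : Int × Int).1 < row ∧ 0 ≤ ((s0-1, s1) : Int × Int).2 ∧
          ((s0-1, s1) : Int × Int).2 < col ∧ pvCell maps ((s0-1, s1) : Int × Int).1 ((s0-1, s1) : Int × Int).2 ≠ 'X' then
        (st.1 ++ [(((s0-1, s1) : Int × Int), 1)], st.2.modify (pvKey (s0+1) s1) 0 (· + 1)) else st := by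
  rw [pvS1b]
  by_cases hc : s0 - 1 > -1 ∧ pvCell maps (s0-1) s1 ≠ 'X'
  · rw [if_pos hc, if_pos ⟨by simp at hc ⊢; omega, by simp; omega, by simpa using hs1, by simpa using hs1c, by simpa using hc.2⟩]
  · rw [if_neg hc, if_neg (fun hx => hc ⟨by have := hx.1; simp at this ⊢; omega, by simpa using hx.2.2.2.2⟩)]

theorem pvS1c_eq (maps : List String) (row col : Int) (s0 s1 : Int)
    (st : List ((Int × Int) × Int) × PySem.Dict (List Char) Int)
    (hs0 : 0 ≤ s0) (hs0r : s0 < row) (hs1 : 0 ≤ s1) (hs1c : s1 < col) :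
    pvS1c maps row col s0 s1 st =
      if 0 ≤ ((s0, s1+1) : Int × Int).1 ∧ ((s0, s1+1) : Int × Int).1 < row ∧ 0 ≤ ((s0, s1+1) : Int × Int).2 ∧
          ((s0, s1+1) : Int × Int).2 < col ∧ pvCell maps ((s0, s1+1) : Int × Int).1 ((s0, s1+1) : Int × Int).2 ≠ 'X' then
        (st.1 ++ [(((s0, s1+1) : Int × Int), 1)], st.2.modify (pvKey (s0+1) s1) 0 (· + 1)) else st := by
  rw [pvS1c]
  by_cases hc : s1 + 1 < col ∧ pvCell maps s0 (s1+1) ≠ 'X'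
  · rw [if_pos hc, if_pos ⟨by simpa using hs0, by simpa using hs0r, by simp; omega, by simpa using hc.1, by simpa using hc.2⟩]
  · rw [if_neg hc, if_neg (fun hx => hc ⟨by simpa using hx.2.2.2.1, by simpa using hx.2.2.2.2⟩)]

theorem pvS1d_eq (maps : List String) (row col : Int) (s0 s1 : Int)
    (st : List ((Int × Int) × Int) × PySem.Dict (List Char) Int)
    (hs0 : 0 ≤ s0) (hs0r : s0 < row) (hs1 : 0 ≤ s1) (hs1c : s1 < col) :
    pvS1d maps row col s0 s1 st =
      if 0 ≤ ((s0, s1-1) : Int × Int).1 ∧ ((s0, s1-1) : Int × Int).1 < row ∧ 0 ≤ ((s0, s1-1) : Int × Int).2 ∧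
          ((s0, s1-1) : Int × Int).2 < col ∧ pvCell maps ((s0, s1-1) : Int × Int).1 ((s0, s1-1) : Int × Int).2 ≠ 'X' then
        (st.1 ++ [(((s0, s1-1) : Int × Int), 1)], st.2.modify (pvKey (s0+1) s1) 0 (· + 1)) else st := by
  rw [pvS1d]
  by_cases hc : s1 - 1 > -1 ∧ pvCell maps s0 (s1-1) ≠ 'X'
  · rw [if_pos hc, if_pos ⟨by simpa using hs0, by simpa using hs0r, by have := hc.1; simp at this ⊢; omega, by simp; omega, by simpa using hc.2⟩]
  · rw [if_neg hc, if_neg (fun hx => hc ⟨by have := hx.2.2.1; simp at this ⊢; omega, by simpa using hx.2.2.2.2⟩)]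

theorem pvS2a_eq (maps : List String) (row col : Int) (s0 s1 : Int)
    (st : List ((Int × Int) × Int) × PySem.Dict (List Char) Int)
    (hs0 : 0 ≤ s0) (hs0r : s0 < row) (hs1 : 0 ≤ s1) (hs1c : s1 < col) :
    pvS2a maps row col s0 s1 st =
      if 0 ≤ ((s0+1, s1) : Int × Int).1 ∧ ((s0+1, s1) : Int × Int).1 < row ∧ 0 ≤ ((s0+1, s1) : Int × Int).2 ∧
          ((s0+1, s1) : Int × Int).2 < col ∧ pvCell maps ((s0+1, s1) : Int × Int).1 ((s0+1, s1) : Int × Int).2 ≠ 'X' then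
        (st.1 ++ [(((s0+1, s1) : Int × Int), 1)], st.2.modify (pvKey (s0+1) s1) 0 (· + 1)) else st := by
  rw [pvS2a]
  by_cases hc : s0 + 1 < row ∧ pvCell maps (s0+1) s1 ≠ 'X'
  · rw [if_pos hc, if_pos ⟨by simp; omega, by simpa using hc.1, by simpa using hs1, by simpa using hs1c, by simpa using hc.2⟩]
  · rw [if_neg hc, if_neg (fun hx => hc ⟨by simpa using hx.2.1, by simpa using hx.2.2.2.2⟩)]

theorem pvS2b_eq (maps : List String) (row col : Int) (s0 s1 : Int)
    (st : List ((Int × Int) × Int) × PySem.Dict (List Char) Int)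
    (hs0 : 0 ≤ s0) (hs0r : s0 < row) (hs1 : 0 ≤ s1) (hs1c : s1 < col) :
    pvS2b maps row col s0 s1 st =
      if 0 ≤ ((s0-1, s1) : Int × Int).1 ∧ ((s0-1, s1) : Int × Int).1 < row ∧ 0 ≤ ((s0-1, s1) : Int × Int).2 ∧
          ((s0-1, s1) : Int × Int).2 < col ∧ pvCell maps ((s0-1, s1) : Int × Int).1 ((s0-1, s1) : Int × Int).2 ≠ 'X' then
        (st.1 ++ [(((s0-1, s1) : Int × Int), 1)], st.2.modify (pvKey (s0-1) s1) 0 (· + 1)) else st := by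
  rw [pvS2b]
  by_cases hc : s0 - 1 > -1 ∧ pvCell maps (s0-1) s1 ≠ 'X'
  · rw [if_pos hc, if_pos ⟨by simp at hc ⊢; omega, by simp; omega, by simpa using hs1, by simpa using hs1c, by simpa using hc.2⟩]
  · rw [if_neg hc, if_neg (fun hx => hc ⟨by have := hx.1; simp at this ⊢; omega, by simpa using hx.2.2.2.2⟩)]

theorem pvS2c_eq (maps : List String) (row col : Int) (s0 s1 : Int)
    (st : List ((Int × Int) × Int) × PySem.Dict (List Char) Int)
    (hs0 : 0 ≤ s0) (hs0r : s0 < row) (hs1 : 0 ≤ s1) (hs1c : s1 < col) :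
    pvS2c maps row col s0 s1 st =
      if 0 ≤ ((s0, s1+1) : Int × Int).1 ∧ ((s0, s1+1) : Int × Int).1 < row ∧ 0 ≤ ((s0, s1+1) : Int × Int).2 ∧
          ((s0, s1+1) : Int × Int).2 < col ∧ pvCell maps ((s0, s1+1) : Int × Int).1 ((s0, s1+1) : Int × Int).2 ≠ 'X' then
        (st.1 ++ [(((s0, s1+1) : Int × Int), 1)], st.2.modify (pvKey s0 (s1+1)) 0 (· + 1)) else st := by
  rw [pvS2c]
  by_cases hc : s1 + 1 < col ∧ pvCell maps s0 (s1+1) ≠ 'X'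
  · rw [if_pos hc, if_pos ⟨by simpa using hs0, by simpa using hs0r, by simp; omega, by simpa using hc.1, by simpa using hc.2⟩]
  · rw [if_neg hc, if_neg (fun hx => hc ⟨by simpa using hx.2.2.2.1, by simpa using hx.2.2.2.2⟩)]

theorem pvS2d_eq (maps : List String) (row col : Int) (s0 s1 : Int)
    (st : List ((Int × Int) × Int) × PySem.Dict (List Char) Int)
    (hs0 : 0 ≤ s0) (hs0r : s0 < row) (hs1 : 0 ≤ s1) (hs1c : s1 < col) :
    pvS2d maps row col s0 s1 st =
      if 0 ≤ ((s0, s1-1) : Int × Int).1 ∧ ((s0, s1-1) : Int × Int).1 < row ∧ 0 ≤ ((s0, s1-1) : Int × Int).2 ∧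
          ((s0, s1-1) : Int × Int).2 < col ∧ pvCell maps ((s0, s1-1) : Int × Int).1 ((s0, s1-1) : Int × Int).2 ≠ 'X' then
        (st.1 ++ [(((s0, s1-1) : Int × Int), 1)], st.2.modify (pvKey s0 (s1-1)) 0 (· + 1)) else st := by
  rw [pvS2d]
  by_cases hc : s1 - 1 > -1 ∧ pvCell maps s0 (s1-1) ≠ 'X'
  · rw [if_pos hc, if_pos ⟨by simpa using hs0, by simpa using hs0r, by have := hc.1; simp at this ⊢; omega, by simp; omega, by simpa using hc.2⟩]
  · rw [if_neg hc, if_neg (fun hx => hc ⟨by have := hx.2.2.1; simp at this ⊢; omega, by simpa using hx.2.2.2.2⟩)]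


theorem pvSeedPush (maps : List String) (row col : Int) (src : Int × Int)
    (st st' : List ((Int × Int) × Int) × PySem.Dict (List Char) Int) (nb kq : Int × Int)
    (hadj : pvAdj src nb) (hkadj : pvAdj src kq)
    (hkqn : (0 ≤ nb.1 ∧ nb.1 < row ∧ 0 ≤ nb.2 ∧ nb.2 < col ∧ pvCell maps nb.1 nb.2 ≠ 'X') →
      0 ≤ kq.1 ∧ 0 ≤ kq.2)
    (hst' : st' = if 0 ≤ nb.1 ∧ nb.1 < row ∧ 0 ≤ nb.2 ∧ nb.2 < col ∧
        pvCell maps nb.1 nb.2 ≠ 'X' then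
      (st.1 ++ [(nb, 1)], st.2.modify (pvKey kq.1 kq.2) 0 (· + 1)) else st) :
    (∀ e ∈ st'.1, e ∈ st.1 ∨ ∃ m, e = (m, (1:Int)) ∧ pvOpn maps row col m ∧ pvAdj src m) ∧
    (pvOpn maps row col nb → (nb, (1:Int)) ∈ st'.1) ∧
    (∀ e ∈ st.1, e ∈ st'.1) ∧
    (st'.1.length ≤ st.1.length + 1) ∧
    (∀ q : Int × Int, 0 ≤ q.1 → 0 ≤ q.2 → ¬ pvAdj src q →
      st'.2.getD (pvKey q.1 q.2) 0 = st.2.getD (pvKey q.1 q.2) 0) := by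
  by_cases hc : 0 ≤ nb.1 ∧ nb.1 < row ∧ 0 ≤ nb.2 ∧ nb.2 < col ∧ pvCell maps nb.1 nb.2 ≠ 'X'
  · rw [if_pos hc] at hst'
    subst hst'
    refine ⟨?_, ?_, ?_, by simp, ?_⟩
    · intro e he
      rcases List.mem_append.mp he with he | he
      · exact Or.inl he
      · exact Or.inr ⟨nb, List.mem_singleton.mp he, ⟨hc.1, hc.2.1, hc.2.2.1, hc.2.2.2.1, hc.2.2.2.2⟩, hadj⟩
    · intro _; simp
    · intro e he; exact List.mem_append_left _ he
    · intro q hq1 hq2 hqa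
      have hkn := hkqn hc
      have hkey : pvKey q.1 q.2 ≠ pvKey kq.1 kq.2 := by
        intro hk
        obtain ⟨e1, e2⟩ := pvKey_inj hq1 hq2 hkn.1 hkn.2 hk
        exact hqa (by rw [show q = kq from Prod.ext e1 e2]; exact hkadj)
      simp only
      rw [PySem.Dict.getD_modify_of_ne _ _ _ hkey]
  · rw [if_neg hc] at hst'
    subst hst'
    refine ⟨fun e he => Or.inl he, ?_, fun e he => he, by omega, fun _ _ _ _ => rfl⟩
    intro hop
    exact absurd ⟨hop.1, hop.2.1, hop.2.2.1, hop.2.2.2.1, hop.2.2.2.2⟩ hc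

theorem pvSA1_inv (maps : List String) (row col : Int) (s0 s1 : Int)
    (hs0 : 0 ≤ s0) (hs0r : s0 < row) (hs1 : 0 ≤ s1) (hs1c : s1 < col) :
    (∀ e ∈ (pvSA1 maps row col s0 s1).1, ∃ m, e = (m, (1:Int)) ∧ pvOpn maps row col m ∧
      pvAdj (s0, s1) m) ∧
    (∀ nb, pvOpn maps row col nb → pvAdj (s0, s1) nb →
      (nb, (1:Int)) ∈ (pvSA1 maps row col s0 s1).1) ∧
    ((pvSA1 maps row col s0 s1).1.length ≤ 4) ∧
    (∀ q : Int × Int, 0 ≤ q.1 → 0 ≤ q.2 → ¬ pvAdj (s0, s1) q →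
      (pvSA1 maps row col s0 s1).2.getD (pvKey q.1 q.2) 0 = 0) := by
  have e1 := pvS1a_eq maps row col s0 s1 ([], PySem.Dict.empty) hs0 hs0r hs1 hs1c
  have h1 := pvSeedPush maps row col (s0, s1) ([], PySem.Dict.empty)
    (pvS1a maps row col s0 s1 ([], PySem.Dict.empty)) (s0+1, s1) (s0+1, s1)
    (Or.inl rfl) (Or.inl rfl)
    (fun _ => ⟨by show (0:Int) ≤ s0+1; omega, by show (0:Int) ≤ s1; omega⟩) e1
  have e2 := pvS1b_eq maps row col s0 s1 (pvS1a maps row col s0 s1 ([], PySem.Dict.empty))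
    hs0 hs0r hs1 hs1c
  have h2 := pvSeedPush maps row col (s0, s1) _ _ (s0-1, s1) (s0+1, s1)
    (Or.inr (Or.inl rfl)) (Or.inl rfl)
    (fun _ => ⟨by show (0:Int) ≤ s0+1; omega, by show (0:Int) ≤ s1; omega⟩) e2
  have e3 := pvS1c_eq maps row col s0 s1 (pvS1b maps row col s0 s1
    (pvS1a maps row col s0 s1 ([], PySem.Dict.empty))) hs0 hs0r hs1 hs1c
  have h3 := pvSeedPush maps row col (s0, s1) _ _ (s0, s1+1) (s0+1, s1)
    (Or.inr (Or.inr (Or.inl rfl))) (Or.inl rfl)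
    (fun _ => ⟨by show (0:Int) ≤ s0+1; omega, by show (0:Int) ≤ s1; omega⟩) e3
  have e4 := pvS1d_eq maps row col s0 s1 (pvS1c maps row col s0 s1 (pvS1b maps row col s0 s1
    (pvS1a maps row col s0 s1 ([], PySem.Dict.empty)))) hs0 hs0r hs1 hs1c
  have h4 := pvSeedPush maps row col (s0, s1) _ _ (s0, s1-1) (s0+1, s1)
    (Or.inr (Or.inr (Or.inr rfl))) (Or.inl rfl)
    (fun _ => ⟨by show (0:Int) ≤ s0+1; omega, by show (0:Int) ≤ s1; omega⟩) e4
  rw [pvSA1]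
  refine ⟨?_, ?_, ?_, ?_⟩
  · intro e he
    rcases h4.1 e he with he' | hnew
    · rcases h3.1 e he' with he'' | hnew
      · rcases h2.1 e he'' with he''' | hnew
        · rcases h1.1 e he''' with he4 | hnew
          · simp at he4
          · exact hnew
        · exact hnew
      · exact hnew
    · exact hnew
  · intro nb hop hadj
    rcases hadj with rfl | rfl | rfl | rfl
    · exact h4.2.2.1 _ (h3.2.2.1 _ (h2.2.2.1 _ (h1.2.1 hop)))
    · exact h4.2.2.1 _ (h3.2.2.1 _ (h2.2.1 hop))
    · exact h4.2.2.1 _ (h3.2.1 hop)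
    · exact h4.2.1 hop
  · have l1 := h1.2.2.2.1
    have l2 := h2.2.2.2.1
    have l3 := h3.2.2.2.1
    have l4 := h4.2.2.2.1
    simp at l1
    omega
  · intro q hq1 hq2 hqa
    rw [h4.2.2.2.2 q hq1 hq2 hqa, h3.2.2.2.2 q hq1 hq2 hqa, h2.2.2.2.2 q hq1 hq2 hqa,
      h1.2.2.2.2 q hq1 hq2 hqa]
    exact PySem.Dict.getD_empty _ _

theorem pvSA2_inv (maps : List String) (row col : Int) (s0 s1 : Int)
    (hs0 : 0 ≤ s0) (hs0r : s0 < row) (hs1 : 0 ≤ s1) (hs1c : s1 < col) :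
    (∀ e ∈ (pvSA2 maps row col s0 s1).1, ∃ m, e = (m, (1:Int)) ∧ pvOpn maps row col m ∧
      pvAdj (s0, s1) m) ∧
    (∀ nb, pvOpn maps row col nb → pvAdj (s0, s1) nb →
      (nb, (1:Int)) ∈ (pvSA2 maps row col s0 s1).1) ∧
    ((pvSA2 maps row col s0 s1).1.length ≤ 4) ∧
    (∀ q : Int × Int, 0 ≤ q.1 → 0 ≤ q.2 → ¬ pvAdj (s0, s1) q →
      (pvSA2 maps row col s0 s1).2.getD (pvKey q.1 q.2) 0 = 0) := by
  have e1 := pvS2a_eq maps row col s0 s1 ([], PySem.Dict.empty) hs0 hs0r hs1 hs1c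
  have h1 := pvSeedPush maps row col (s0, s1) ([], PySem.Dict.empty)
    (pvS2a maps row col s0 s1 ([], PySem.Dict.empty)) (s0+1, s1) (s0+1, s1)
    (Or.inl rfl) (Or.inl rfl) (fun h => ⟨h.1, h.2.2.1⟩) e1
  have e2 := pvS2b_eq maps row col s0 s1 (pvS2a maps row col s0 s1 ([], PySem.Dict.empty))
    hs0 hs0r hs1 hs1c
  have h2 := pvSeedPush maps row col (s0, s1) _ _ (s0-1, s1) (s0-1, s1)
    (Or.inr (Or.inl rfl)) (Or.inr (Or.inl rfl)) (fun h => ⟨h.1, h.2.2.1⟩) e2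
  have e3 := pvS2c_eq maps row col s0 s1 (pvS2b maps row col s0 s1
    (pvS2a maps row col s0 s1 ([], PySem.Dict.empty))) hs0 hs0r hs1 hs1c
  have h3 := pvSeedPush maps row col (s0, s1) _ _ (s0, s1+1) (s0, s1+1)
    (Or.inr (Or.inr (Or.inl rfl))) (Or.inr (Or.inr (Or.inl rfl))) (fun h => ⟨h.1, h.2.2.1⟩) e3
  have e4 := pvS2d_eq maps row col s0 s1 (pvS2c maps row col s0 s1 (pvS2b maps row col s0 s1
    (pvS2a maps row col s0 s1 ([], PySem.Dict.empty)))) hs0 hs0r hs1 hs1c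
  have h4 := pvSeedPush maps row col (s0, s1) _ _ (s0, s1-1) (s0, s1-1)
    (Or.inr (Or.inr (Or.inr rfl))) (Or.inr (Or.inr (Or.inr rfl))) (fun h => ⟨h.1, h.2.2.1⟩) e4
  rw [pvSA2]
  refine ⟨?_, ?_, ?_, ?_⟩
  · intro e he
    rcases h4.1 e he with he' | hnew
    · rcases h3.1 e he' with he'' | hnew
      · rcases h2.1 e he'' with he''' | hnew
        · rcases h1.1 e he''' with he4 | hnew
          · simp at he4
          · exact hnew
        · exact hnew
      · exact hnew
    · exact hnew
  · intro nb hop hadj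
    rcases hadj with rfl | rfl | rfl | rfl
    · exact h4.2.2.1 _ (h3.2.2.1 _ (h2.2.2.1 _ (h1.2.1 hop)))
    · exact h4.2.2.1 _ (h3.2.2.1 _ (h2.2.1 hop))
    · exact h4.2.2.1 _ (h3.2.1 hop)
    · exact h4.2.1 hop
  · have l1 := h1.2.2.2.1
    have l2 := h2.2.2.2.1
    have l3 := h3.2.2.2.1
    have l4 := h4.2.2.2.1
    simp at l1
    omega
  · intro q hq1 hq2 hqa
    rw [h4.2.2.2.2 q hq1 hq2 hqa, h3.2.2.2.2 q hq1 hq2 hqa, h2.2.2.2.2 q hq1 hq2 hqa,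
      h1.2.2.2.2 q hq1 hq2 hqa]
    exact PySem.Dict.getD_empty _ _

theorem pvUnmarkA_le (row col : Int) (cnt : PySem.Dict (List Char) Int) :
    pvUnmarkA row col cnt ≤ row.toNat * col.toNat := by
  rw [← pvGrid_card row col]
  exact Finset.card_filter_le _ _

-- stage-level results for A's loop, run from either seeding
theorem pvStageA_found (maps : List String) (row col : Int) (target : Char) (s0 s1 : Int)
    (hs0 : 0 ≤ s0) (hs0r : s0 < row) (hs1 : 0 ≤ s1) (hs1c : s1 < col)
    (st : List ((Int × Int) × Int) × PySem.Dict (List Char) Int)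
    (hinv : (∀ e ∈ st.1, ∃ m, e = (m, (1:Int)) ∧ pvOpn maps row col m ∧ pvAdj (s0, s1) m) ∧
      (∀ nb, pvOpn maps row col nb → pvAdj (s0, s1) nb → (nb, (1:Int)) ∈ st.1) ∧
      (st.1.length ≤ 4) ∧
      (∀ q : Int × Int, 0 ≤ q.1 → 0 ≤ q.2 → ¬ pvAdj (s0, s1) q →
        st.2.getD (pvKey q.1 q.2) 0 = 0))
    (D : Nat) (hD : pvHas maps row col (s0, s1) target D) (hD1 : 1 ≤ D)
    (hDmin : ∀ j, 1 ≤ j → j < D → ¬ pvHas maps row col (s0, s1) target j) :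
    pvLoopA maps row col target (2 * (row.toNat * col.toNat) + 13) st.1 st.2 = (D : Int) := by
  obtain ⟨hchar, hmem, hlen, hcnt⟩ := hinv
  obtain ⟨D', rfl⟩ : ∃ D', D = D' + 1 := ⟨D - 1, by omega⟩
  obtain ⟨ws, hgood, hwlen, hnodup, hnoseed⟩ :=
    pvMinWitness maps row col (s0, s1) target D' hD (fun j h1 h2 => hDmin j h1 h2)
  have hres := pvLoopA_found maps row col target (s0, s1) ws hgood hnodup
    (by rw [hwlen]; exact hDmin)
    (2 * (row.toNat * col.toNat) + 13) st.1 st.2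
    (by
      intro e he
      obtain ⟨m, rfl, hop, hadj⟩ := hchar e he
      exact ⟨0, by norm_num, ⟨hop, (s0, s1), rfl, hadj⟩⟩)
    ⟨0, st.1, [], by simp, by
      intro e he
      obtain ⟨m, rfl, hop, hadj⟩ := hchar e he
      norm_num, by simp⟩
    ⟨0, by omega, ⟨0, by omega, by
      norm_num
      exact hmem _ (hgood.2.1 0 (by omega)) (hgood.2.2.1 (by omega))⟩, by
      intro j hj0 hj
      apply hcnt _ (hgood.2.1 j hj).1 (hgood.2.1 j hj).2.2.1
      exact hnoseed j hj hj0⟩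
    (by
      have := pvUnmarkA_le row col st.2
      omega)
  rw [hres, hwlen]

theorem pvStageA_none (maps : List String) (row col : Int) (target : Char) (s0 s1 : Int)
    (st : List ((Int × Int) × Int) × PySem.Dict (List Char) Int)
    (hchar : ∀ e ∈ st.1, ∃ m, e = (m, (1:Int)) ∧ pvOpn maps row col m ∧ pvAdj (s0, s1) m)
    (hnone : ∀ j, 1 ≤ j → ¬ pvHas maps row col (s0, s1) target j) :
    pvLoopA maps row col target (2 * (row.toNat * col.toNat) + 13) st.1 st.2 = 0 := by
  apply pvLoopA_none maps row col target (s0, s1) hnone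
  intro e he
  obtain ⟨m, rfl, hop, hadj⟩ := hchar e he
  exact ⟨0, by norm_num, ⟨hop, (s0, s1), rfl, hadj⟩⟩



-- ==== scan lemmas ====

theorem pvStepB_comm (maps : List String) (r c : Int)
    (st : Option (Int × Int) × Option (Int × Int) × Option (Int × Int)) :
    pvStepB maps r c (st.1, st.2.1) = ((pvStepA maps r c st).1, (pvStepA maps r c st).2.1) := by
  by_cases hS : pvCell maps r c = 'S'
  · have hL : ¬ (pvCell maps r c = 'L') := by rw [hS]; decide
    have hE : ¬ (pvCell maps r c = 'E') := by rw [hS]; decide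
    simp [pvStepA, pvStepB, hS, hL, hE]
  · by_cases hL : pvCell maps r c = 'L'
    · have hE : ¬ (pvCell maps r c = 'E') := by rw [hL]; decide
      simp [pvStepA, pvStepB, hS, hL, hE]
    · by_cases hE : pvCell maps r c = 'E'
      · simp [pvStepA, pvStepB, hS, hL, hE]
      · simp [pvStepA, pvStepB, hS, hL, hE]

theorem pvScan_hom (maps : List String) (row col : Int) :
    pvScanB maps row col = ((pvScanA maps row col).1, (pvScanA maps row col).2.1) := by
  rw [pvScanA, pvScanB]
  exact List.foldl_hom
    (f := fun st : Option (Int × Int) × Option (Int × Int) × Option (Int × Int) =>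
      ((st.1, st.2.1) : Option (Int × Int) × Option (Int × Int)))
    (g₁ := fun st r => (PySem.List.pyRange 0 col 1).foldl (fun st c => pvStepA maps r c st) st)
    (g₂ := fun st r => (PySem.List.pyRange 0 col 1).foldl (fun st c => pvStepB maps r c st) st)
    (l := PySem.List.pyRange 0 row 1) (init := (none, none, none))
    (fun st r => List.foldl_hom
      (f := fun st : Option (Int × Int) × Option (Int × Int) × Option (Int × Int) =>
        ((st.1, st.2.1) : Option (Int × Int) × Option (Int × Int)))
      (g₁ := fun st c => pvStepA maps r c st)
      (g₂ := fun st c => pvStepB maps r c st)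
      (l := PySem.List.pyRange 0 col 1) (init := st)
      (fun st c => pvStepB_comm maps r c st))

theorem pvStepA_fst (maps : List String) (r c : Int)
    (st : Option (Int × Int) × Option (Int × Int) × Option (Int × Int)) :
    (pvStepA maps r c st).1 = if pvCell maps r c = 'S' then some (r, c) else st.1 := by
  rw [pvStepA]
  by_cases hS : pvCell maps r c = 'S' <;> by_cases hL : pvCell maps r c = 'L' <;>
    by_cases hE : pvCell maps r c = 'E' <;> simp [hS, hL, hE]

theorem pvStepA_snd (maps : List String) (r c : Int)
    (st : Option (Int × Int) × Option (Int × Int) × Option (Int × Int)) :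
    (pvStepA maps r c st).2.1 = if pvCell maps r c = 'L' then some (r, c) else st.2.1 := by
  rw [pvStepA]
  by_cases hS : pvCell maps r c = 'S' <;> by_cases hL : pvCell maps r c = 'L' <;>
    by_cases hE : pvCell maps r c = 'E' <;> simp [hS, hL, hE]

-- soundness of a `some` scan component
theorem pvScanA_sok (maps : List String) (row col : Int) :
    (∀ p, (pvScanA maps row col).1 = some p →
      0 ≤ p.1 ∧ p.1 < row ∧ 0 ≤ p.2 ∧ p.2 < col ∧ pvCell maps p.1 p.2 = 'S') ∧
    (∀ p, (pvScanA maps row col).2.1 = some p →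
      0 ≤ p.1 ∧ p.1 < row ∧ 0 ≤ p.2 ∧ p.2 < col ∧ pvCell maps p.1 p.2 = 'L') := by
  rw [pvScanA]
  have main : ∀ (rs : List Int), (∀ r ∈ rs, 0 ≤ r ∧ r < row) →
      ∀ st, (∀ p, (st : Option (Int × Int) × Option (Int × Int) × Option (Int × Int)).1 = some p →
          0 ≤ p.1 ∧ p.1 < row ∧ 0 ≤ p.2 ∧ p.2 < col ∧ pvCell maps p.1 p.2 = 'S') →
        (∀ p, st.2.1 = some p →
          0 ≤ p.1 ∧ p.1 < row ∧ 0 ≤ p.2 ∧ p.2 < col ∧ pvCell maps p.1 p.2 = 'L') →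
      (∀ p, (rs.foldl (fun st r => (PySem.List.pyRange 0 col 1).foldl
          (fun st c => pvStepA maps r c st) st) st).1 = some p →
        0 ≤ p.1 ∧ p.1 < row ∧ 0 ≤ p.2 ∧ p.2 < col ∧ pvCell maps p.1 p.2 = 'S') ∧
      (∀ p, (rs.foldl (fun st r => (PySem.List.pyRange 0 col 1).foldl
          (fun st c => pvStepA maps r c st) st) st).2.1 = some p →
        0 ≤ p.1 ∧ p.1 < row ∧ 0 ≤ p.2 ∧ p.2 < col ∧ pvCell maps p.1 p.2 = 'L') := by
    intro rs
    induction rs with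
    | nil => intro _ st h1 h2; exact ⟨h1, h2⟩
    | cons r rs ih =>
      intro hb st h1 h2
      rw [List.foldl_cons]
      have hr := hb r (by simp)
      have inner : ∀ (cs : List Int), (∀ c ∈ cs, 0 ≤ c ∧ c < col) → ∀ st,
          (∀ p, (st : Option (Int × Int) × Option (Int × Int) × Option (Int × Int)).1 = some p →
            0 ≤ p.1 ∧ p.1 < row ∧ 0 ≤ p.2 ∧ p.2 < col ∧ pvCell maps p.1 p.2 = 'S') →
          (∀ p, st.2.1 = some p →
            0 ≤ p.1 ∧ p.1 < row ∧ 0 ≤ p.2 ∧ p.2 < col ∧ pvCell maps p.1 p.2 = 'L') →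
          (∀ p, (cs.foldl (fun st c => pvStepA maps r c st) st).1 = some p →
            0 ≤ p.1 ∧ p.1 < row ∧ 0 ≤ p.2 ∧ p.2 < col ∧ pvCell maps p.1 p.2 = 'S') ∧
          (∀ p, (cs.foldl (fun st c => pvStepA maps r c st) st).2.1 = some p →
            0 ≤ p.1 ∧ p.1 < row ∧ 0 ≤ p.2 ∧ p.2 < col ∧ pvCell maps p.1 p.2 = 'L') := by
        intro cs
        induction cs with
        | nil => intro _ st h1 h2; exact ⟨h1, h2⟩
        | cons c cs ihc =>
          intro hbc st h1 h2
          rw [List.foldl_cons]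
          have hc := hbc c (by simp)
          apply ihc (fun x hx => hbc x (by simp [hx]))
          · intro p hp
            rw [pvStepA_fst] at hp
            split_ifs at hp with hcell
            · cases Option.some.inj hp
              exact ⟨hr.1, hr.2, hc.1, hc.2, hcell⟩
            · exact h1 p hp
          · intro p hp
            rw [pvStepA_snd] at hp
            split_ifs at hp with hcell
            · cases Option.some.inj hp
              exact ⟨hr.1, hr.2, hc.1, hc.2, hcell⟩
            · exact h2 p hp
      obtain ⟨hh1, hh2⟩ := inner (PySem.List.pyRange 0 col 1)
        (fun x hx => by have := PySem.List.mem_pyRange_one.mp hx; omega) st h1 h2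
      exact ih (fun x hx => hb x (by simp [hx])) _ hh1 hh2
  exact main (PySem.List.pyRange 0 row 1)
    (fun x hx => by have := PySem.List.mem_pyRange_one.mp hx; omega)
    (none, none, none) (by intro p hp; simp at hp) (by intro p hp; simp at hp)

-- completeness: if the scanned region holds a marker, the component is `some`
theorem pvScanA_complete (maps : List String) (row col : Int) :
    (∀ r c, 0 ≤ r → r < row → 0 ≤ c → c < col → pvCell maps r c = 'S' →
      (pvScanA maps row col).1 ≠ none) ∧
    (∀ r c, 0 ≤ r → r < row → 0 ≤ c → c < col → pvCell maps r c = 'L' →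
      (pvScanA maps row col).2.1 ≠ none) := by
  rw [pvScanA]
  have inner_mono : ∀ (r : Int) (cs : List Int) st,
      ((st : Option (Int × Int) × Option (Int × Int) × Option (Int × Int)).1 ≠ none →
        (cs.foldl (fun st c => pvStepA maps r c st) st).1 ≠ none) ∧
      (st.2.1 ≠ none → (cs.foldl (fun st c => pvStepA maps r c st) st).2.1 ≠ none) := by
    intro r cs
    induction cs with
    | nil => intro st; exact ⟨id, id⟩
    | cons c cs ihc =>
      intro st
      rw [List.foldl_cons]
      constructor
      · intro h
        refine (ihc _).1 ?_
        rw [pvStepA_fst]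
        split_ifs <;> simp [h]
      · intro h
        refine (ihc _).2 ?_
        rw [pvStepA_snd]
        split_ifs <;> simp [h]
  have inner_hit : ∀ (r : Int) (cs : List Int) (c : Int), c ∈ cs → ∀ st,
      (pvCell maps r c = 'S' → (cs.foldl (fun st c => pvStepA maps r c st) st).1 ≠ none) ∧
      (pvCell maps r c = 'L' → (cs.foldl (fun st c => pvStepA maps r c st) st).2.1 ≠ none) := by
    intro r cs
    induction cs with
    | nil => intro c hc; simp at hc
    | cons c0 cs ihc =>
      intro c hc st
      rw [List.foldl_cons]
      rcases List.mem_cons.mp hc with rfl | hc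
      · constructor
        · intro hcell
          refine (inner_mono r cs _).1 ?_
          rw [pvStepA_fst, if_pos hcell]
          simp
        · intro hcell
          refine (inner_mono r cs _).2 ?_
          rw [pvStepA_snd, if_pos hcell]
          simp
      · exact ihc c hc _
  have outer_mono : ∀ (rs : List Int) st,
      ((st : Option (Int × Int) × Option (Int × Int) × Option (Int × Int)).1 ≠ none →
        (rs.foldl (fun st r => (PySem.List.pyRange 0 col 1).foldl
          (fun st c => pvStepA maps r c st) st) st).1 ≠ none) ∧
      (st.2.1 ≠ none → (rs.foldl (fun st r => (PySem.List.pyRange 0 col 1).foldl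
          (fun st c => pvStepA maps r c st) st) st).2.1 ≠ none) := by
    intro rs
    induction rs with
    | nil => intro st; exact ⟨id, id⟩
    | cons r rs ih =>
      intro st
      rw [List.foldl_cons]
      exact ⟨fun h => (ih _).1 ((inner_mono r _ _).1 h),
        fun h => (ih _).2 ((inner_mono r _ _).2 h)⟩
  have outer_hit : ∀ (rs : List Int) (r : Int), r ∈ rs → ∀ (c : Int), c ∈ PySem.List.pyRange 0 col 1 → ∀ st,
      (pvCell maps r c = 'S' → (rs.foldl (fun st r => (PySem.List.pyRange 0 col 1).foldl
          (fun st c => pvStepA maps r c st) st) st).1 ≠ none) ∧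
      (pvCell maps r c = 'L' → (rs.foldl (fun st r => (PySem.List.pyRange 0 col 1).foldl
          (fun st c => pvStepA maps r c st) st) st).2.1 ≠ none) := by
    intro rs
    induction rs with
    | nil => intro r hr; simp at hr
    | cons r0 rs ih =>
      intro r hr c hcmem st
      rw [List.foldl_cons]
      rcases List.mem_cons.mp hr with rfl | hr
      · exact ⟨fun hcell => (outer_mono rs _).1 ((inner_hit r _ c hcmem st).1 hcell),
          fun hcell => (outer_mono rs _).2 ((inner_hit r _ c hcmem st).2 hcell)⟩
      · exact ih r hr c hcmem _
  constructor
  · intro r c hr0 hrr hc0 hcc hcell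
    exact (outer_hit _ r (PySem.List.mem_pyRange_one.mpr ⟨hr0, hrr⟩) c
      (PySem.List.mem_pyRange_one.mpr ⟨hc0, hcc⟩) (none, none, none)).1 hcell
  · intro r c hr0 hrr hc0 hcc hcell
    exact (outer_hit _ r (PySem.List.mem_pyRange_one.mpr ⟨hr0, hrr⟩) c
      (PySem.List.mem_pyRange_one.mpr ⟨hc0, hcc⟩) (none, none, none)).2 hcell

theorem solution_eq_alt (maps : List String) : solution maps = solution_alt maps := by
  classical
  rw [solution, solution_alt]
  simp only [pvScan_hom]
  cases hscan : (pvScanA maps (PySem.List.len maps)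
      (PySem.Str.len (PySem.List.pyGetD maps 0 ""))).1 with
  | none => rfl
  | some p =>
    obtain ⟨s0, s1⟩ := p
    simp only []
    obtain ⟨hs0, hs0r, hs1, hs1c, hcS⟩ :=
      (pvScanA_sok maps (PySem.List.len maps)
        (PySem.Str.len (PySem.List.pyGetD maps 0 ""))).1 (s0, s1) hscan
    by_cases hex : ∃ k, 1 ≤ k ∧ pvHas maps (PySem.List.len maps)
        (PySem.Str.len (PySem.List.pyGetD maps 0 "")) (s0, s1) 'L' k
    · -- the lever is reachable
      have hD := Nat.find_spec hex
      have hDmin : ∀ j, 1 ≤ j → j < Nat.find hex → ¬ pvHas maps (PySem.List.len maps)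
          (PySem.Str.len (PySem.List.pyGetD maps 0 "")) (s0, s1) 'L' j :=
        fun j h1 h2 has => Nat.find_min hex h2 ⟨h1, has⟩
      rw [pvStageA_found maps _ _ 'L' s0 s1 hs0 hs0r hs1 hs1c _
        (pvSA1_inv maps _ _ s0 s1 hs0 hs0r hs1 hs1c) (Nat.find hex) hD.2 hD.1 hDmin]
      rw [pvDistB_found maps _ _ (s0, s1) 'L' (Nat.find hex) hD.2 hD.1 hDmin]
      simp only []
      rw [if_neg (by
        have h1 := hD.1
        intro h0
        exact absurd (by exact_mod_cast h0 : Nat.find hex = 0) (by omega))]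
      -- the lever was scanned: reaching it gives an in-range 'L' cell
      obtain ⟨pl, hwl, hcl⟩ := hD.2
      have hople := pvOpn_of_W maps _ _ (s0, s1) pl (by have := hD.1; omega) hwl
      have hlev := (pvScanA_complete maps (PySem.List.len maps)
        (PySem.Str.len (PySem.List.pyGetD maps 0 ""))).2 pl.1 pl.2
        hople.1 hople.2.1 hople.2.2.1 hople.2.2.2.1 hcl
      cases hscan2 : (pvScanA maps (PySem.List.len maps)
          (PySem.Str.len (PySem.List.pyGetD maps 0 ""))).2.1 with
      | none => exact absurd hscan2 hlev
      | some q =>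
        obtain ⟨l0, l1⟩ := q
        simp only []
        obtain ⟨hl0, hl0r, hl1, hl1c, hcL⟩ :=
          (pvScanA_sok maps (PySem.List.len maps)
            (PySem.Str.len (PySem.List.pyGetD maps 0 ""))).2 (l0, l1) hscan2
        by_cases hex2 : ∃ k, 1 ≤ k ∧ pvHas maps (PySem.List.len maps)
            (PySem.Str.len (PySem.List.pyGetD maps 0 "")) (l0, l1) 'E' k
        · have hE := Nat.find_spec hex2
          have hEmin : ∀ j, 1 ≤ j → j < Nat.find hex2 → ¬ pvHas maps (PySem.List.len maps)
              (PySem.Str.len (PySem.List.pyGetD maps 0 "")) (l0, l1) 'E' j :=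
            fun j h1 h2 has => Nat.find_min hex2 h2 ⟨h1, has⟩
          rw [pvStageA_found maps _ _ 'E' l0 l1 hl0 hl0r hl1 hl1c _
            (pvSA2_inv maps _ _ l0 l1 hl0 hl0r hl1 hl1c) (Nat.find hex2) hE.2 hE.1 hEmin]
          rw [pvDistB_found maps _ _ (l0, l1) 'E' (Nat.find hex2) hE.2 hE.1 hEmin]
          simp only []
          rw [if_neg (by
            have h2 := hE.1
            intro h0
            have h3 : ((Nat.find hex2 : Int)) = 0 := by omega
            exact absurd (by exact_mod_cast h3 : Nat.find hex2 = 0) (by omega))]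
        · have hnone2 : ∀ j, 1 ≤ j → ¬ pvHas maps (PySem.List.len maps)
              (PySem.Str.len (PySem.List.pyGetD maps 0 "")) (l0, l1) 'E' j :=
            fun j h1 has => hex2 ⟨j, h1, has⟩
          rw [pvStageA_none maps _ _ 'E' l0 l1 _
            ((pvSA2_inv maps _ _ l0 l1 hl0 hl0r hl1 hl1c).1) hnone2]
          rw [pvDistB_none maps _ _ (l0, l1) 'E' hnone2]
          simp only []
          rw [if_pos (by ring)]
    · have hnone : ∀ j, 1 ≤ j → ¬ pvHas maps (PySem.List.len maps)
          (PySem.Str.len (PySem.List.pyGetD maps 0 "")) (s0, s1) 'L' j :=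
        fun j h1 has => hex ⟨j, h1, has⟩
      rw [pvStageA_none maps _ _ 'L' s0 s1 _
        ((pvSA1_inv maps _ _ s0 s1 hs0 hs0r hs1 hs1c).1) hnone]
      rw [pvDistB_none maps _ _ (s0, s1) 'L' hnone]
      simp only []
      rw [if_pos trivial]

-- ===== VERDICT (by name: the statement is the Claim_ definition above) =====
theorem solution_spec : Claim_equal_solution := by
  intro maps _ _
  exact solution_eq_alt maps
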